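-- pv_equiv track=rewrite | github.com/junheeLee96/algorithm | 프로그래머스/2/250136. ［PCCP 기출문제］ 2번 ／ 석유 시추/［PCCP 기출문제］ 2번 ／ 석유 시추.py | solution
-- ===== SOURCE A (Python) =====
-- from collections import deque
--
-- dy = [-1, 1, 0, 0]
--
-- dx = [0, 0, 1, -1]
--
-- def bfs(y, x, visited, land, cnt, rows, cols):
--     q = deque()
--     q.append([y, x])
--     visited[y][x] = cnt
--     count = 1
--
--     while q:
--         cy, cx = q.popleft()
--         for i in range(4):
--             ny, nx = cy + dy[i], cx + dx[i]
--             if ny < 0 or ny >= cols or nx < 0 or nx >= rows: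
--                 continue
--             if visited[ny][nx] == 0 and land[ny][nx] == 1:
--                 visited[ny][nx] = cnt
--                 q.append([ny, nx])
--                 count += 1
--     return count
--
-- def solution(land):
--     cnt = 1
--     answer = []
--     val = {}
--     rows = len(land[0])
--     cols = len(land)
--     visited = [[0] * rows for _ in range(cols)]
--     for x in range(rows):
--         for y in range(cols):
--             if visited[y][x] == 0 and land[y][x] == 1:
--                 val[cnt] = bfs(y, x, visited, land, cnt, rows, cols)
--                 cnt += 1
--     for x in range(rows):
--         tmp2 = 0
--         tmp = set()
--         for y in range(cols):
--             if visited[y][x] != 0: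
--                 tmp.add(visited[y][x])
--         for i in tmp:
--             tmp2 += val[i]
--         answer.append(tmp2)
--
--     return max(answer)
-- ===== SOURCE B (Python) =====
-- def solution(land):
--     rows = len(land[0])
--     cols = len(land)
--     best = 0
--     # For each drilling column, flood out from all of its land cells at once and
--     # count the cells reached; no component labels or size table are ever built.
--     for x in range(rows):
--         stack = [(y, x) for y in range(cols) if land[y][x] == 1]
--         seen = set(stack)
--         while stack:
--             cy, cx = stack.pop()
--             for ny, nx in ((cy - 1, cx), (cy + 1, cx), (cy, cx + 1), (cy, cx - 1)):
--                 if 0 <= ny < cols and 0 <= nx < rows and land[ny][nx] == 1 and (ny, nx) not in seen: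
--                     seen.add((ny, nx))
--                     stack.append((ny, nx))
--         best = max(best, len(seen))
--     return best
-- ===== Notes on version B (the rewrite author's own statement) =====
-- stated objective: alternative
-- what changed: The global BFS component labelling with a component-size dict and per-column distinct-label sums is replaced by an independent multi-source flood count per column: each column's land cells seed one fill over a visited set and the column's value is simply the number of cells reached, so no labels, no size table and no distinct-label bookkeeping exist at all.
import Mathlib
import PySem

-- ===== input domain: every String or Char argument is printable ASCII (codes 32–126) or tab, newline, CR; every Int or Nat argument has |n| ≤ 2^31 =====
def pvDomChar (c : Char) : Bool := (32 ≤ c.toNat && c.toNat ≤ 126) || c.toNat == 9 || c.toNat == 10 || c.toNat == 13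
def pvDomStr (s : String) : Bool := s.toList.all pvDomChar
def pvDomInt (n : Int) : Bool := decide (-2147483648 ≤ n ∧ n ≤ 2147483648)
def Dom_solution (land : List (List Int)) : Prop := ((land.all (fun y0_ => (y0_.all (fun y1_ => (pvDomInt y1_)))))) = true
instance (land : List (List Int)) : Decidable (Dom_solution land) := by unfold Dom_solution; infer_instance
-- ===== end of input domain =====

-- B replaces A's global BFS component labelling (size dict + per-column distinct-label sums) by an
-- independent multi-source flood count per column: no labels or size table exist at all. Same answers, different algorithm.


-- shared 2-d indexing helpers: under Pre_solution every matrix access of either Python is with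
-- 0 ≤ y < len(m) and 0 ≤ x < len(m[y]) (the loops range over exactly those indices and the
-- neighbour guards run first), so the total getD/set forms are exact there.
def pvMget (m : List (List Int)) (y x : Int) : Int := (m.getD y.toNat []).getD x.toNat 0
def pvMset (m : List (List Int)) (y x v : Int) : List (List Int) :=
  m.modify y.toNat (fun r => r.set x.toNat v)

-- ===== PORT A =====
def pvDy : List Int := [-1, 1, 0, 0]
def pvDx : List Int := [0, 0, 1, -1]

def pvBfsStep (land : List (List Int)) (cnt rows cols cy cx : Int)
    (s : List (Int × Int) × List (List Int) × Int) (i : Int) :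
    List (Int × Int) × List (List Int) × Int :=
  let ny := cy + PySem.List.pyGetD pvDy i 0
  let nx := cx + PySem.List.pyGetD pvDx i 0
  if ny < 0 ∨ cols ≤ ny ∨ nx < 0 ∨ rows ≤ nx then s
  else if pvMget s.2.1 ny nx = 0 ∧ pvMget land ny nx = 1 then
    (s.1 ++ [(ny, nx)], pvMset s.2.1 ny nx cnt, s.2.2 + 1)
  else s

-- the while loop of bfs; fuel cols*rows+1 always suffices: each iteration pops one queue cell and
-- every enqueued cell first marks a distinct previously-0 cell of visited (proved below).
def pvBfsLoop (land : List (List Int)) (cnt rows cols : Int) :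
    Nat → List (Int × Int) → List (List Int) → Int → List (List Int) × Int
  | 0, _, V, c => (V, c)
  | _ + 1, [], V, c => (V, c)
  | fuel + 1, (cy, cx) :: q, V, c =>
    let s := (PySem.List.pyRange 0 4 1).foldl (pvBfsStep land cnt rows cols cy cx) (q, V, c)
    pvBfsLoop land cnt rows cols fuel s.1 s.2.1 s.2.2

-- Python bfs mutates visited and returns count; the port returns (visited, count)
def pvBfs (y x : Int) (visited land : List (List Int)) (cnt rows cols : Int) :
    List (List Int) × Int :=
  pvBfsLoop land cnt rows cols (cols.toNat * rows.toNat + 1) [(y, x)] (pvMset visited y x cnt) 1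

-- the body of the scanning loop of phase 1 ('if visited[y][x] == 0 and land[y][x] == 1: ...')
def pvCellA (land : List (List Int)) (rows cols : Int)
    (st : List (List Int) × PySem.Dict Int Int × Int) (x y : Int) :
    List (List Int) × PySem.Dict Int Int × Int :=
  if pvMget st.1 y x = 0 ∧ pvMget land y x = 1 then
    let r := pvBfs y x st.1 land st.2.2 rows cols
    (r.1, st.2.1.insert st.2.2 r.2, st.2.2 + 1)
  else st

-- the body of the answer loop: set of labels seen in column x, then their summed sizes
-- ('for i in tmp: tmp2 += val[i]' sums over a set, order-independent; val[i] is always present)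
def pvColA (cols : Int) (V : List (List Int)) (val : PySem.Dict Int Int) (x : Int) : Int :=
  let tmp := (PySem.List.pyRange 0 cols 1).foldl (fun (t : PySem.Set Int) y =>
    if pvMget V y x ≠ 0 then PySem.Set.add t (pvMget V y x) else t) PySem.Set.empty
  tmp.foldl (fun a i => a + val.getD i 0) 0

def solution (land : List (List Int)) : Int :=
  let rows : Int := PySem.List.len (PySem.List.pyGetD land 0 [])
  let cols : Int := PySem.List.len land
  let visited0 := List.replicate cols.toNat (List.replicate rows.toNat (0 : Int))
  let st := (PySem.List.pyRange 0 rows 1).foldl (fun st x =>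
    (PySem.List.pyRange 0 cols 1).foldl (fun st y => pvCellA land rows cols st x y) st)
    (visited0, (PySem.Dict.empty : PySem.Dict Int Int), 1)
  let answer := (PySem.List.pyRange 0 rows 1).foldl
    (fun ans x => ans ++ [pvColA cols st.1 st.2.1 x]) ([] : List Int)
  -- max(answer); answer is nonempty under Pre_solution
  (PySem.List.max? answer (fun v => v)).getD 0

-- ===== PORT B =====
-- the per-column flood loop of B: stack of cells to expand, 'seen' set of cells already reached;
-- Python's while loop, with fuel (each pop either shrinks the stack or grows 'seen', so
-- cols*rows + cols + 1 always suffices, proved below)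
def pvColLoop (land : List (List Int)) (rows cols : Int) :
    Nat → List (Int × Int) → PySem.Set (Int × Int) → PySem.Set (Int × Int)
  | 0, _, seen => seen
  | _ + 1, [], seen => seen
  | fuel + 1, (cy, cx) :: st, seen =>
    let s := [(cy - 1, cx), (cy + 1, cx), (cy, cx + 1), (cy, cx - 1)].foldl
      (fun (s : List (Int × Int) × PySem.Set (Int × Int)) p =>
        if 0 ≤ p.1 ∧ p.1 < cols ∧ 0 ≤ p.2 ∧ p.2 < rows ∧
            pvMget land p.1 p.2 = 1 ∧ PySem.Set.contains s.2 p = false then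
          (p :: s.1, PySem.Set.add s.2 p)
        else s) (st, seen)
    pvColLoop land rows cols fuel s.1 s.2

def solution_alt (land : List (List Int)) : Int :=
  let rows : Int := PySem.List.len (PySem.List.pyGetD land 0 [])
  let cols : Int := PySem.List.len land
  (PySem.List.pyRange 0 rows 1).foldl (fun best x =>
    let stack := (PySem.List.pyRange 0 cols 1).filterMap
      (fun y => if pvMget land y x = 1 then some (y, x) else none)
    let seen := pvColLoop land rows cols (cols.toNat * rows.toNat + cols.toNat + 1) stack
      (PySem.Set.ofList stack)
    max best (PySem.List.len (seen : List (Int × Int)))) 0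

-- ===== PRECONDITION & SPEC =====
-- Pre_solution excludes exactly the inputs on which A raises: an empty grid (IndexError on
-- land[0]), an empty first row (ValueError: max of an empty list), and a grid with a later row
-- shorter than row 0 (IndexError on land[y][x]).
def Pre_solution (land : List (List Int)) : Prop :=
  land ≠ [] ∧ land.headI ≠ [] ∧ ∀ r ∈ land, land.headI.length ≤ r.length
instance (land : List (List Int)) : Decidable (Pre_solution land) := by
  unfold Pre_solution; infer_instance
def pvWitness_solution : List (List Int) := [[0, 1], [1, 1]]

def Spec_solution (land : List (List Int)) (out : Int) : Prop := out = solution_alt land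
instance (land : List (List Int)) (out : Int) : Decidable (Spec_solution land out) := by
  unfold Spec_solution; infer_instance

-- ===== CLAIM (what is proved, stated in full; the proofs are below) =====
def Claim_equal_solution : Prop :=
  ∀ (land : List (List Int)), Dom_solution land → Pre_solution land →
    Spec_solution land (solution land)

-- ===== LEMMAS AND PROOFS =====

-- cells are (y, x) pairs, matching the Python's index order
def pvInb (rows cols : Int) (p : Int × Int) : Prop :=
  0 ≤ p.1 ∧ p.1 < cols ∧ 0 ≤ p.2 ∧ p.2 < rows

def pvNbrs (p : Int × Int) : List (Int × Int) :=
  [(p.1 - 1, p.2), (p.1 + 1, p.2), (p.1, p.2 + 1), (p.1, p.2 - 1)]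

def pvSh (rows cols : Int) (V : List (List Int)) : Prop :=
  V.length = cols.toNat ∧ ∀ r ∈ V, r.length = rows.toNat

-- a cell carrying the label cnt
def pvM (rows cols cnt : Int) (V : List (List Int)) (p : Int × Int) : Prop :=
  pvInb rows cols p ∧ pvMget V p.1 p.2 = cnt

-- in-bounds, unlabelled in V, land
def pvFreeAt (land : List (List Int)) (rows cols : Int) (V : List (List Int)) (p : Int × Int) : Prop :=
  pvInb rows cols p ∧ pvMget V p.1 p.2 = 0 ∧ pvMget land p.1 p.2 = 1

-- an in-bounds land cell
def pvGood (land : List (List Int)) (rows cols : Int) (p : Int × Int) : Prop :=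
  pvInb rows cols p ∧ pvMget land p.1 p.2 = 1

-- cells reachable from the seed s through cells free in V
inductive pvReach (land : List (List Int)) (rows cols : Int) (V : List (List Int)) (s : Int × Int) :
    (Int × Int) → Prop
  | base : pvFreeAt land rows cols V s → pvReach land rows cols V s s
  | step {p q : Int × Int} : pvReach land rows cols V s p → q ∈ pvNbrs p →
      pvFreeAt land rows cols V q → pvReach land rows cols V s q

-- connectivity of land cells in the grid graph (independent of any visited state)
inductive pvConn (land : List (List Int)) (rows cols : Int) :
    (Int × Int) → (Int × Int) → Prop
  | base {p : Int × Int} : pvGood land rows cols p → pvConn land rows cols p p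
  | step {p q r : Int × Int} : pvConn land rows cols p q → r ∈ pvNbrs q →
      pvGood land rows cols r → pvConn land rows cols p r

def pvCount (v : Int) (V : List (List Int)) : Nat :=
  (V.map (fun r => r.countP (fun a => a == v))).sum

lemma pvMget_eq_getD {V : List (List Int)} {y x : Int} :
    pvMget V y x = (V[y.toNat]?.getD []).getD x.toNat 0 := by
  simp [pvMget, List.getD_eq_getElem?_getD]

lemma pvMset_eq_set {V : List (List Int)} {y x v : Int} :
    pvMset V y x v = V.set y.toNat ((V[y.toNat]?.getD []).set x.toNat v) := by
  simp [pvMset, List.modify_eq_set]; rfl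

lemma pvSh_pvMset {rows cols : Int} {V : List (List Int)} (h : pvSh rows cols V)
    {y x : Int} (hp : pvInb rows cols (y, x)) (v : Int) :
    pvSh rows cols (pvMset V y x v) := by
  obtain ⟨h1, h2⟩ := h
  rw [pvMset_eq_set]
  constructor
  · simpa using h1
  · intro r hr
    rcases List.mem_or_eq_of_mem_set hr with hr' | rfl
    · exact h2 r hr'
    · have hy : y.toNat < V.length := by
        obtain ⟨a1, a2, a3, a4⟩ := hp; omega
      have := h2 (V[y.toNat]) (List.getElem_mem hy)
      simp [List.getElem?_eq_getElem hy, this]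

lemma pvMget_pvMset_self {rows cols : Int} {V : List (List Int)} (h : pvSh rows cols V)
    {y x : Int} (hp : pvInb rows cols (y, x)) (v : Int) :
    pvMget (pvMset V y x v) y x = v := by
  obtain ⟨h1, h2⟩ := h
  obtain ⟨a1, a2, a3, a4⟩ := hp
  have hy : y.toNat < V.length := by simp at a2 ⊢; omega
  have hx : x.toNat < (V[y.toNat]).length := by
    have := h2 (V[y.toNat]) (List.getElem_mem hy)
    simp at a4 ⊢; omega
  simp [pvMget_eq_getD, pvMset_eq_set, List.getD_eq_getElem?_getD, hy, hx]

lemma pvMget_pvMset_ne {V : List (List Int)} {y x y' x' : Int}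
    (hy : 0 ≤ y) (hx : 0 ≤ x) (hy' : 0 ≤ y') (hx' : 0 ≤ x')
    (hne : (y', x') ≠ (y, x)) (v : Int) :
    pvMget (pvMset V y x v) y' x' = pvMget V y' x' := by
  rw [pvMget_eq_getD, pvMget_eq_getD, pvMset_eq_set, List.getElem?_set]
  have hcase : y'.toNat ≠ y.toNat ∨ (y'.toNat = y.toNat ∧ x'.toNat ≠ x.toNat) := by
    by_cases hy0 : y'.toNat = y.toNat
    · refine Or.inr ⟨hy0, fun hx0 => hne (by rw [Prod.mk.injEq]; omega)⟩
    · exact Or.inl hy0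
  rcases hcase with h | ⟨h1, h2⟩
  · rw [if_neg (fun hh => h hh.symm)]
  · rw [if_pos h1.symm]
    by_cases hlt : y.toNat < V.length
    · rw [if_pos hlt, h1, Option.getD_some]
      rw [List.getD_eq_getElem?_getD, List.getD_eq_getElem?_getD, List.getElem?_set,
        if_neg (fun hh => h2 hh.symm)]
    · rw [if_neg hlt, h1, List.getElem?_eq_none (by omega)]

lemma pvMget_natCast {V : List (List Int)} {j i : Nat} (hj : j < V.length)
    (hi : i < (V[j]).length) : pvMget V (j : Int) (i : Int) = V[j][i] := by
  rw [pvMget_eq_getD]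
  simp [List.getElem?_eq_getElem hj, List.getD_eq_getElem?_getD, List.getElem?_eq_getElem hi]

lemma pvMget_replicate_zero (a b : Nat) (y x : Int) :
    pvMget (List.replicate a (List.replicate b (0 : Int))) y x = 0 := by
  rw [pvMget_eq_getD]
  rcases h : (List.replicate a (List.replicate b (0 : Int)))[y.toNat]? with - | r
  · simp
  · have : r = List.replicate b (0 : Int) := by
      have := List.mem_of_getElem? h
      simpa using (List.eq_of_mem_replicate this)
    subst this
    simp [List.getD_eq_getElem?_getD, List.getElem?_replicate]
    split <;> rfl

-- ---------- connectivity facts ----------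

lemma pvNbrs_symm {p q : Int × Int} (h : q ∈ pvNbrs p) : p ∈ pvNbrs q := by
  obtain ⟨y, x⟩ := p
  obtain ⟨y', x'⟩ := q
  simp only [pvNbrs, List.mem_cons, List.not_mem_nil, or_false, Prod.mk.injEq] at h ⊢
  omega

lemma pvConn_good_right {land : List (List Int)} {rows cols : Int} {p q : Int × Int}
    (h : pvConn land rows cols p q) : pvGood land rows cols q := by
  induction h with
  | base h => exact h
  | step _ _ h _ => exact h

lemma pvConn_trans {land : List (List Int)} {rows cols : Int} {p q r : Int × Int}
    (h1 : pvConn land rows cols p q) (h2 : pvConn land rows cols q r) :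
    pvConn land rows cols p r := by
  induction h2 with
  | base _ => exact h1
  | step _ hn hg ih => exact pvConn.step ih hn hg

lemma pvConn_symm {land : List (List Int)} {rows cols : Int} {p q : Int × Int}
    (h : pvConn land rows cols p q) : pvConn land rows cols q p := by
  induction h with
  | base h => exact pvConn.base h
  | @step q r hc hn hg ih =>
    exact pvConn_trans (pvConn.step (pvConn.base hg) (pvNbrs_symm hn) (pvConn_good_right hc)) ih

lemma pvReach_free {land : List (List Int)} {rows cols : Int} {V : List (List Int)}
    {s p : Int × Int} (h : pvReach land rows cols V s p) : pvFreeAt land rows cols V p := by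
  induction h with
  | base h => exact h
  | step _ _ h => exact h

-- under a closure hypothesis (nonzero cells have nonzero good neighbours), reachability through
-- free cells from a free seed is exactly land connectivity from that seed
lemma pvReach_iff_conn {land : List (List Int)} {rows cols : Int} {V : List (List Int)}
    {s : Int × Int}
    (hcl : ∀ p, pvInb rows cols p → pvMget V p.1 p.2 ≠ 0 →
      ∀ q ∈ pvNbrs p, pvGood land rows cols q → pvMget V q.1 q.2 ≠ 0)
    (hfree : pvFreeAt land rows cols V s) (p : Int × Int) :
    pvReach land rows cols V s p ↔ pvConn land rows cols s p := by
  constructor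
  · intro h
    induction h with
    | base h => exact pvConn.base ⟨h.1, h.2.2⟩
    | step _ hn hf ih => exact pvConn.step ih hn ⟨hf.1, hf.2.2⟩
  · intro h
    induction h with
    | base _ => exact pvReach.base hfree
    | @step q r hc hn hg ih =>
      have hqfree : pvFreeAt land rows cols V q := pvReach_free ih
      have hrfree : pvMget V r.1 r.2 = 0 := by
        by_contra h0
        exact absurd hqfree.2.1
          (hcl r hg.1 h0 q (pvNbrs_symm hn) ⟨hqfree.1, hqfree.2.2⟩)
      exact pvReach.step ih hn ⟨hg.1, hrfree, hg.2⟩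

-- ---------- counting ----------

lemma pvNatSum_set (l : List Nat) (j : Nat) (hj : j < l.length) (a : Nat) :
    (l.set j a).sum + l[j] = l.sum + a := by
  have hsplit : l.sum = (l.take j).sum + (l[j] + (l.drop (j + 1)).sum) := by
    conv_lhs => rw [← List.take_append_drop j l, List.drop_eq_getElem_cons hj]
    rw [List.sum_append, List.sum_cons]
  rw [List.set_eq_take_append_cons_drop, if_pos hj, List.sum_append, List.sum_cons]
  omega

lemma pvCount_pvMset_mark {rows cols : Int} {V : List (List Int)} (h : pvSh rows cols V)
    {y x : Int} (hp : pvInb rows cols (y, x)) {v : Int} (hv : v ≠ 0)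
    (h0 : pvMget V y x = 0) :
    pvCount v (pvMset V y x v) = pvCount v V + 1 ∧
      pvCount 0 V = pvCount 0 (pvMset V y x v) + 1 := by
  obtain ⟨h1, h2⟩ := h
  obtain ⟨a1, a2, a3, a4⟩ := hp
  have hj : y.toNat < V.length := by simp at a2 ⊢; omega
  have hi : x.toNat < (V[y.toNat]).length := by
    have := h2 (V[y.toNat]) (List.getElem_mem hj)
    simp at a4 ⊢; omega
  have hrow : V[y.toNat][x.toNat] = 0 := by
    rw [pvMget_eq_getD] at h0
    simpa [List.getElem?_eq_getElem hj, List.getD_eq_getElem?_getD,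
      List.getElem?_eq_getElem hi] using h0
  have hset : pvMset V y x v = V.set y.toNat ((V[y.toNat]).set x.toNat v) := by
    rw [pvMset_eq_set]; simp [List.getElem?_eq_getElem hj]
  have hmap : ∀ w : Int, (pvMset V y x v).map (fun r => r.countP (fun a => a == w)) =
      (V.map (fun r => r.countP (fun a => a == w))).set y.toNat
        (((V[y.toNat]).set x.toNat v).countP (fun a => a == w)) := by
    intro w; rw [hset, List.map_set]
  have hlen : ∀ w : Int, y.toNat < (V.map (fun r => r.countP (fun a => a == w))).length := by
    intro w; simpa using hj
  have hcv : ((V[y.toNat]).set x.toNat v).countP (fun a => a == v) =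
      (V[y.toNat]).countP (fun a => a == v) + 1 := by
    rw [List.countP_set hi, hrow]
    simp [Ne.symm hv]
  have hc0 : ((V[y.toNat]).set x.toNat v).countP (fun a => a == (0 : Int)) + 1 =
      (V[y.toNat]).countP (fun a => a == (0 : Int)) := by
    rw [List.countP_set hi, hrow]
    have hpos : 0 < (V[y.toNat]).countP (fun a => a == (0 : Int)) := by
      rw [List.countP_pos_iff]
      exact ⟨0, by rw [← hrow]; exact List.getElem_mem hi, by simp⟩
    simp [hv]
    omega
  constructor
  · have := pvNatSum_set (V.map (fun r => r.countP (fun a => a == v))) y.toNat (hlen v)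
      (((V[y.toNat]).set x.toNat v).countP (fun a => a == v))
    rw [List.getElem_map] at this
    unfold pvCount
    rw [hmap v]
    omega
  · have := pvNatSum_set (V.map (fun r => r.countP (fun a => a == (0 : Int)))) y.toNat (hlen 0)
      (((V[y.toNat]).set x.toNat v).countP (fun a => a == (0 : Int)))
    rw [List.getElem_map] at this
    unfold pvCount
    rw [hmap 0]
    omega

lemma pvCount_le_size {rows cols : Int} {V : List (List Int)} (h : pvSh rows cols V) (v : Int) :
    pvCount v V ≤ cols.toNat * rows.toNat := by
  obtain ⟨h1, h2⟩ := h
  have := List.sum_le_card_nsmul (V.map (fun r => r.countP (fun a => a == v))) rows.toNat ?_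
  · unfold pvCount
    simpa [h1, smul_eq_mul] using this
  · intro n hn
    obtain ⟨r, hr, rfl⟩ := List.mem_map.mp hn
    exact le_trans List.countP_le_length (le_of_eq (h2 r hr))

lemma pvCount_eq_zero {rows cols : Int} {V : List (List Int)} (h : pvSh rows cols V) {v : Int}
    (hall : ∀ y x : Int, pvInb rows cols (y, x) → pvMget V y x ≠ v) : pvCount v V = 0 := by
  obtain ⟨h1, h2⟩ := h
  apply List.sum_eq_zero
  intro n hn
  obtain ⟨r, hr, rfl⟩ := List.mem_map.mp hn
  rw [List.countP_eq_zero]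
  intro a ha
  obtain ⟨j, hj, rfl⟩ := List.mem_iff_getElem.mp hr
  obtain ⟨i, hi, rfl⟩ := List.mem_iff_getElem.mp ha
  have hinb : pvInb rows cols ((j : Int), (i : Int)) := by
    have := h2 _ (List.getElem_mem hj)
    refine ⟨by omega, by simp; omega, by omega, by simp; omega⟩
  have := hall j i hinb
  rw [pvMget_natCast hj hi] at this
  simpa using this

-- the finite set of in-bounds cells
def pvCells (rows cols : Int) : Finset (Int × Int) :=
  (Finset.range cols.toNat ×ˢ Finset.range rows.toNat).image
    (fun c => ((c.1 : Int), (c.2 : Int)))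

lemma mem_pvCells {rows cols : Int} {p : Int × Int} :
    p ∈ pvCells rows cols ↔ pvInb rows cols p := by
  obtain ⟨py, px⟩ := p
  simp only [pvCells, Finset.mem_image, Finset.mem_product, Finset.mem_range, pvInb,
    Prod.mk.injEq]
  constructor
  · rintro ⟨⟨j, i⟩, ⟨hj, hi⟩, he1, he2⟩
    omega
  · rintro ⟨h1, h2, h3, h4⟩
    exact ⟨(py.toNat, px.toNat), ⟨by omega, by omega⟩, by omega, by omega⟩

lemma pvCells_card {rows cols : Int} :
    (pvCells rows cols).card = cols.toNat * rows.toNat := by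
  rw [pvCells, Finset.card_image_of_injective _ (fun a b h => by
    obtain ⟨h1, h2⟩ := Prod.mk.injEq .. ▸ h
    exact Prod.ext (by exact_mod_cast h1) (by exact_mod_cast h2)),
    Finset.card_product]
  simp

lemma pvListSum_eq_sum_range (l : List Nat) :
    l.sum = ∑ j ∈ Finset.range l.length, l.getD j 0 := by
  induction l with
  | nil => simp
  | cons a t ih =>
    rw [List.sum_cons, ih, List.length_cons, Finset.sum_range_succ']
    simp only [List.getD_cons_succ, List.getD_cons_zero]
    omega

lemma pvCountP_eq_sum_range (l : List Int) (v : Int) :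
    l.countP (fun a => a == v) =
      ∑ i ∈ Finset.range l.length, if l.getD i 0 = v then 1 else 0 := by
  induction l with
  | nil => simp
  | cons a t ih =>
    rw [List.countP_cons, List.length_cons, Finset.sum_range_succ']
    simp only [List.getD_cons_succ, List.getD_cons_zero]
    rw [← ih]
    by_cases h : a = v
    · simp [h]
    · simp [h, (by simpa using h : (a == v) = false)]



lemma pvCount_eq_card {rows cols : Int} {V : List (List Int)} (hsh : pvSh rows cols V) (v : Int) :
    pvCount v V = ((pvCells rows cols).filter (fun p => pvMget V p.1 p.2 = v)).card := by
  obtain ⟨hlen, hrow⟩ := hsh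
  rw [pvCells, Finset.filter_image, Finset.card_image_of_injective _ (fun a b h => by
      obtain ⟨h1, h2⟩ := Prod.mk.injEq .. ▸ h
      exact Prod.ext (by exact_mod_cast h1) (by exact_mod_cast h2)),
    Finset.card_filter, Finset.sum_product]
  unfold pvCount
  rw [pvListSum_eq_sum_range]
  rw [show (V.map (fun r => r.countP (fun a => a == v))).length = cols.toNat from by
    simp [hlen]]
  apply Finset.sum_congr rfl
  intro j hj
  rw [Finset.mem_range] at hj
  have hjV : j < V.length := by omega
  have hgetD : (V.map (fun r => r.countP (fun a => a == v))).getD j 0 =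
      (V[j]).countP (fun a => a == v) := by
    rw [List.getD_eq_getElem?_getD, List.getElem?_map, List.getElem?_eq_getElem hjV]
    rfl
  rw [hgetD, pvCountP_eq_sum_range,
    show (V[j]).length = rows.toNat from hrow _ (List.getElem_mem hjV)]
  apply Finset.sum_congr rfl
  intro i hi
  rw [Finset.mem_range] at hi
  have hiR : i < (V[j]).length := by rw [hrow _ (List.getElem_mem hjV)]; omega
  have : pvMget V (j : Int) (i : Int) = (V[j]).getD i 0 := by
    rw [pvMget_natCast hjV hiR, List.getD_eq_getElem?_getD, List.getElem?_eq_getElem hiR]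
    rfl
  simp [this]

-- values changed only from 0 to cnt leave every other label's count unchanged
lemma pvCount_congr_fill {rows cols cnt : Int} {V V' : List (List Int)}
    (hsh : pvSh rows cols V) (hsh' : pvSh rows cols V')
    (hpt : ∀ p : Int × Int, pvInb rows cols p →
      pvMget V' p.1 p.2 = pvMget V p.1 p.2 ∨
        (pvMget V p.1 p.2 = 0 ∧ pvMget V' p.1 p.2 = cnt))
    {l : Int} (h0 : l ≠ 0) (hc : l ≠ cnt) : pvCount l V' = pvCount l V := by
  rw [pvCount_eq_card hsh', pvCount_eq_card hsh]
  congr 1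
  apply Finset.filter_congr
  intro p hp
  rcases hpt p (mem_pvCells.mp hp) with he | ⟨he1, he2⟩
  · rw [he]
  · rw [he1, he2]
    constructor
    · intro h; exact absurd h.symm hc
    · intro h; exact absurd h.symm h0

-- ---------- the BFS of A: queue machinery and its characterisation ----------

-- the one-neighbour step of the fill, with B-style explicit bounds (shown equal to A's guard)
def pvBStep (land : List (List Int)) (cnt rows cols : Int)
    (s : List (Int × Int) × List (List Int) × Int) (q : Int × Int) :
    List (Int × Int) × List (List Int) × Int :=
  if 0 ≤ q.1 ∧ q.1 < cols ∧ 0 ≤ q.2 ∧ q.2 < rows ∧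
      pvMget s.2.1 q.1 q.2 = 0 ∧ pvMget land q.1 q.2 = 1 then
    (s.1 ++ [q], pvMset s.2.1 q.1 q.2 cnt, s.2.2 + 1)
  else s

-- the news/matrix/count produced by scanning a list of candidate cells from an empty accumulator
def pvNstepL (land : List (List Int)) (cnt rows cols : Int) (L : List (Int × Int))
    (V : List (List Int)) (c : Int) : List (Int × Int) × List (List Int) × Int :=
  L.foldl (pvBStep land cnt rows cols) ([], V, c)

lemma pvStep_eq (land : List (List Int)) (cnt rows cols : Int)
    (s : List (Int × Int) × List (List Int) × Int) (q : Int × Int) :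
    (if q.1 < 0 ∨ cols ≤ q.1 ∨ q.2 < 0 ∨ rows ≤ q.2 then s
     else if pvMget s.2.1 q.1 q.2 = 0 ∧ pvMget land q.1 q.2 = 1 then
       (s.1 ++ [q], pvMset s.2.1 q.1 q.2 cnt, s.2.2 + 1)
     else s) = pvBStep land cnt rows cols s q := by
  unfold pvBStep
  by_cases hb : q.1 < 0 ∨ cols ≤ q.1 ∨ q.2 < 0 ∨ rows ≤ q.2
  · rw [if_pos hb, if_neg]
    intro hc
    obtain ⟨c1, c2, c3, c4, -, -⟩ := hc
    omega
  · rw [if_neg hb]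
    by_cases hm : pvMget s.2.1 q.1 q.2 = 0 ∧ pvMget land q.1 q.2 = 1
    · rw [if_pos hm, if_pos ⟨by omega, by omega, by omega, by omega, hm.1, hm.2⟩]
    · rw [if_neg hm, if_neg]
      intro hc
      exact hm ⟨hc.2.2.2.2.1, hc.2.2.2.2.2⟩

lemma pvBfsFold_eq (land : List (List Int)) (cnt rows cols cy cx : Int)
    (s : List (Int × Int) × List (List Int) × Int) :
    (PySem.List.pyRange 0 4 1).foldl (pvBfsStep land cnt rows cols cy cx) s =
      (pvNbrs (cy, cx)).foldl (pvBStep land cnt rows cols) s := by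
  have hr : PySem.List.pyRange 0 4 1 = [0, 1, 2, 3] := by decide
  have e0 : ∀ t, pvBfsStep land cnt rows cols cy cx t 0 =
      pvBStep land cnt rows cols t (cy - 1, cx) := by
    intro t
    simp only [pvBfsStep, show PySem.List.pyGetD pvDy (0 : Int) 0 = -1 from by decide,
      show PySem.List.pyGetD pvDx (0 : Int) 0 = 0 from by decide]
    rw [show cy + (-1 : Int) = cy - 1 from by ring, show cx + (0 : Int) = cx from by ring]
    exact pvStep_eq land cnt rows cols t (cy - 1, cx)
  have e1 : ∀ t, pvBfsStep land cnt rows cols cy cx t 1 =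
      pvBStep land cnt rows cols t (cy + 1, cx) := by
    intro t
    simp only [pvBfsStep, show PySem.List.pyGetD pvDy (1 : Int) 0 = 1 from by decide,
      show PySem.List.pyGetD pvDx (1 : Int) 0 = 0 from by decide]
    rw [show cx + (0 : Int) = cx from by ring]
    exact pvStep_eq land cnt rows cols t (cy + 1, cx)
  have e2 : ∀ t, pvBfsStep land cnt rows cols cy cx t 2 =
      pvBStep land cnt rows cols t (cy, cx + 1) := by
    intro t
    simp only [pvBfsStep, show PySem.List.pyGetD pvDy (2 : Int) 0 = 0 from by decide,
      show PySem.List.pyGetD pvDx (2 : Int) 0 = 1 from by decide]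
    rw [show cy + (0 : Int) = cy from by ring]
    exact pvStep_eq land cnt rows cols t (cy, cx + 1)
  have e3 : ∀ t, pvBfsStep land cnt rows cols cy cx t 3 =
      pvBStep land cnt rows cols t (cy, cx - 1) := by
    intro t
    simp only [pvBfsStep, show PySem.List.pyGetD pvDy (3 : Int) 0 = 0 from by decide,
      show PySem.List.pyGetD pvDx (3 : Int) 0 = -1 from by decide]
    rw [show cy + (0 : Int) = cy from by ring, show cx + (-1 : Int) = cx - 1 from by ring]
    exact pvStep_eq land cnt rows cols t (cy, cx - 1)
  rw [hr]
  simp only [List.foldl_cons, List.foldl_nil, pvNbrs]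
  rw [e0, e1, e2, e3]

lemma pvBfold_factor (land : List (List Int)) (cnt rows cols : Int) :
    ∀ (L : List (Int × Int)) (w : List (Int × Int)) (V : List (List Int)) (c : Int),
      L.foldl (pvBStep land cnt rows cols) (w, V, c) =
        (w ++ (pvNstepL land cnt rows cols L V c).1,
          (pvNstepL land cnt rows cols L V c).2.1, (pvNstepL land cnt rows cols L V c).2.2) := by
  intro L
  induction L with
  | nil => intro w V c; simp [pvNstepL]
  | cons q L ih =>
    intro w V c
    simp only [pvNstepL, List.foldl_cons]
    by_cases hf : 0 ≤ q.1 ∧ q.1 < cols ∧ 0 ≤ q.2 ∧ q.2 < rows ∧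
        pvMget V q.1 q.2 = 0 ∧ pvMget land q.1 q.2 = 1
    · rw [show pvBStep land cnt rows cols (w, V, c) q =
          (w ++ [q], pvMset V q.1 q.2 cnt, c + 1) from by simp [pvBStep, hf],
        show pvBStep land cnt rows cols ([], V, c) q =
          ([] ++ [q], pvMset V q.1 q.2 cnt, c + 1) from by simp [pvBStep, hf]]
      rw [ih (w ++ [q]) _ _, ih ([] ++ [q]) _ _]
      simp [pvNstepL]
    · rw [show pvBStep land cnt rows cols (w, V, c) q = (w, V, c) from by simp [pvBStep, hf],
        show pvBStep land cnt rows cols ([], V, c) q = ([], V, c) from by simp [pvBStep, hf]]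
      exact ih w V c

lemma pvNstepL_spec (land : List (List Int)) (rows cols cnt : Int) (hcnt : 1 ≤ cnt) :
    ∀ (L : List (Int × Int)) (V : List (List Int)) (c : Int), pvSh rows cols V →
      pvSh rows cols (pvNstepL land cnt rows cols L V c).2.1 ∧
      (∀ y x : Int, pvInb rows cols (y, x) →
        pvMget (pvNstepL land cnt rows cols L V c).2.1 y x =
          if (y, x) ∈ (pvNstepL land cnt rows cols L V c).1 then cnt else pvMget V y x) ∧
      (∀ q ∈ (pvNstepL land cnt rows cols L V c).1, q ∈ L ∧ pvInb rows cols q ∧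
        pvMget V q.1 q.2 = 0 ∧ pvMget land q.1 q.2 = 1) ∧
      (∀ q ∈ L, pvInb rows cols q → pvMget land q.1 q.2 = 1 →
        pvMget (pvNstepL land cnt rows cols L V c).2.1 q.1 q.2 ≠ 0) ∧
      (pvNstepL land cnt rows cols L V c).2.2 = c + (pvNstepL land cnt rows cols L V c).1.length ∧
      pvCount cnt (pvNstepL land cnt rows cols L V c).2.1 =
        pvCount cnt V + (pvNstepL land cnt rows cols L V c).1.length ∧
      pvCount 0 V =
        pvCount 0 (pvNstepL land cnt rows cols L V c).2.1 +
          (pvNstepL land cnt rows cols L V c).1.length := by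
  intro L
  induction L with
  | nil =>
    intro V c hsh
    refine ⟨hsh, ?_, ?_, ?_, by simp [pvNstepL], by simp [pvNstepL], by simp [pvNstepL]⟩
    · intro y x hinb; simp [pvNstepL]
    · intro q hq; simp [pvNstepL] at hq
    · intro q hq; simp at hq
  | cons q L ih =>
    intro V c hsh
    by_cases hf : 0 ≤ q.1 ∧ q.1 < cols ∧ 0 ≤ q.2 ∧ q.2 < rows ∧
        pvMget V q.1 q.2 = 0 ∧ pvMget land q.1 q.2 = 1
    · -- q is freshly marked
      have hq_inb : pvInb rows cols q := ⟨hf.1, hf.2.1, hf.2.2.1, hf.2.2.2.1⟩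
      have hq0 : pvMget V q.1 q.2 = 0 := hf.2.2.2.2.1
      have hql : pvMget land q.1 q.2 = 1 := hf.2.2.2.2.2
      have hstep : pvNstepL land cnt rows cols (q :: L) V c =
          ([q] ++ (pvNstepL land cnt rows cols L (pvMset V q.1 q.2 cnt) (c + 1)).1,
            (pvNstepL land cnt rows cols L (pvMset V q.1 q.2 cnt) (c + 1)).2.1,
            (pvNstepL land cnt rows cols L (pvMset V q.1 q.2 cnt) (c + 1)).2.2) := by
        show (q :: L).foldl (pvBStep land cnt rows cols) ([], V, c) = _
        rw [List.foldl_cons, show pvBStep land cnt rows cols ([], V, c) q =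
          ([q], pvMset V q.1 q.2 cnt, c + 1) from by simp [pvBStep, hf]]
        have := pvBfold_factor land cnt rows cols L [q] (pvMset V q.1 q.2 cnt) (c + 1)
        simpa [pvNstepL] using this
      have hq_inb' : pvInb rows cols (q.1, q.2) := hq_inb
      have hshV' : pvSh rows cols (pvMset V q.1 q.2 cnt) := pvSh_pvMset hsh hq_inb' cnt
      obtain ⟨i1, i2, i3, i4, i5, i6, i7⟩ := ih (pvMset V q.1 q.2 cnt) (c + 1) hshV'
      have hcnt0 : cnt ≠ 0 := by omega
      have hselfc : pvMget (pvMset V q.1 q.2 cnt) q.1 q.2 = cnt :=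
        pvMget_pvMset_self hsh hq_inb' cnt
      have hVne : ∀ p : Int × Int, pvInb rows cols p → p ≠ q →
          pvMget (pvMset V q.1 q.2 cnt) p.1 p.2 = pvMget V p.1 p.2 := by
        intro p hp hne
        exact pvMget_pvMset_ne hq_inb.1 hq_inb.2.2.1 hp.1 hp.2.2.1 (by simpa using hne) cnt
      have hnsne : ∀ p ∈ (pvNstepL land cnt rows cols L (pvMset V q.1 q.2 cnt) (c + 1)).1,
          p ≠ q := by
        intro p hp hpq
        have := (i3 p hp).2.2.1
        rw [hpq] at this
        rw [hselfc] at this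
        omega
      rw [hstep]
      refine ⟨i1, ?_, ?_, ?_, ?_, ?_, ?_⟩
      · -- pointwise characterisation
        intro y x hinb
        rw [i2 y x hinb]
        by_cases hm : (y, x) ∈ (pvNstepL land cnt rows cols L (pvMset V q.1 q.2 cnt) (c + 1)).1
        · simp [hm]
        · rw [if_neg hm]
          by_cases hyq : (y, x) = q
          · obtain ⟨rfl, rfl⟩ : y = q.1 ∧ x = q.2 :=
              ⟨congrArg Prod.fst hyq, congrArg Prod.snd hyq⟩
            rw [if_pos (by simp), hselfc]
          · rw [hVne (y, x) hinb hyq, if_neg (by simp [hm, hyq])]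
      · -- provenance of the news
        intro p hp
        rcases List.mem_append.mp hp with hp1 | hp2
        · have : p = q := by simpa using hp1
          subst this
          exact ⟨List.mem_cons_self, hq_inb, hq0, hql⟩
        · obtain ⟨hpL, hpinb, hp0, hpl⟩ := i3 p hp2
          refine ⟨List.mem_cons_of_mem _ hpL, hpinb, ?_, hpl⟩
          rw [← hVne p hpinb (hnsne p hp2)]
          exact hp0
      · -- every scanned land cell ends nonzero
        intro p hpmem hpinb hpl
        rcases List.mem_cons.mp hpmem with rfl | hpL
        · rw [i2 p.1 p.2 hpinb]
          by_cases hm : (p.1, p.2) ∈ (pvNstepL land cnt rows cols L (pvMset V p.1 p.2 cnt) (c + 1)).1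
          · simp only [if_pos hm]; omega
          · rw [if_neg hm, hselfc]; omega
        · exact i4 p hpL hpinb hpl
      · -- count of news
        simp only [List.length_append, List.length_cons, List.length_nil]
        omega
      · -- cnt-count
        have := (pvCount_pvMset_mark hsh hq_inb' hcnt0 hq0).1
        simp only [List.length_append, List.length_cons, List.length_nil]
        omega
      · -- zero-count
        have := (pvCount_pvMset_mark hsh hq_inb' hcnt0 hq0).2
        simp only [List.length_append, List.length_cons, List.length_nil]
        omega
    · -- q is skipped
      have hstep : pvNstepL land cnt rows cols (q :: L) V c = pvNstepL land cnt rows cols L V c := by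
        show (q :: L).foldl (pvBStep land cnt rows cols) ([], V, c) = _
        rw [List.foldl_cons, show pvBStep land cnt rows cols ([], V, c) q = ([], V, c) from by
          simp [pvBStep, hf]]
        rfl
      obtain ⟨i1, i2, i3, i4, i5, i6, i7⟩ := ih V c hsh
      rw [hstep]
      refine ⟨i1, i2, ?_, ?_, i5, i6, i7⟩
      · intro p hp
        obtain ⟨hpL, h2, h3, h4⟩ := i3 p hp
        exact ⟨List.mem_cons_of_mem _ hpL, h2, h3, h4⟩
      · intro p hpmem hpinb hpl
        rcases List.mem_cons.mp hpmem with rfl | hpL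
        · have hp0 : pvMget V p.1 p.2 ≠ 0 := by
            intro hc
            exact hf ⟨hpinb.1, hpinb.2.1, hpinb.2.2.1, hpinb.2.2.2, hc, hpl⟩
          rw [i2 p.1 p.2 hpinb]
          by_cases hm : (p.1, p.2) ∈ (pvNstepL land cnt rows cols L V c).1
          · simp only [if_pos hm]; omega
          · rw [if_neg hm]; exact hp0
        · exact i4 p hpL hpinb hpl

lemma pvBfsLoop_inv (land : List (List Int)) (rows cols cnt : Int) (V0 : List (List Int))
    (s : Int × Int) (hcnt : 1 ≤ cnt) :
    ∀ (fuel : Nat) (w : List (Int × Int)) (V : List (List Int)) (c : Int),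
      pvSh rows cols V →
      (∀ y x : Int, pvInb rows cols (y, x) → pvMget V y x = pvMget V0 y x ∨
        (pvMget V0 y x = 0 ∧ pvMget land y x = 1 ∧ pvMget V y x = cnt)) →
      (∀ p ∈ w, pvM rows cols cnt V p) →
      (∀ p, pvM rows cols cnt V p → pvReach land rows cols V0 s p) →
      (∀ p, pvM rows cols cnt V p → p ∈ w ∨ ∀ q ∈ pvNbrs p, pvInb rows cols q →
        pvMget land q.1 q.2 = 1 → pvMget V q.1 q.2 ≠ 0) →
      c = (pvCount cnt V : Int) →
      pvCount 0 V + w.length ≤ fuel →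
      pvSh rows cols (pvBfsLoop land cnt rows cols fuel w V c).1 ∧
      (∀ y x : Int, pvInb rows cols (y, x) →
        pvMget (pvBfsLoop land cnt rows cols fuel w V c).1 y x = pvMget V0 y x ∨
        (pvMget V0 y x = 0 ∧ pvMget land y x = 1 ∧
          pvMget (pvBfsLoop land cnt rows cols fuel w V c).1 y x = cnt)) ∧
      (∀ p, pvM rows cols cnt (pvBfsLoop land cnt rows cols fuel w V c).1 p →
        pvReach land rows cols V0 s p) ∧
      (∀ p, pvM rows cols cnt V p → pvM rows cols cnt (pvBfsLoop land cnt rows cols fuel w V c).1 p) ∧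
      (∀ p, pvM rows cols cnt (pvBfsLoop land cnt rows cols fuel w V c).1 p →
        ∀ q ∈ pvNbrs p, pvInb rows cols q → pvMget land q.1 q.2 = 1 →
          pvMget (pvBfsLoop land cnt rows cols fuel w V c).1 q.1 q.2 ≠ 0) ∧
      (pvBfsLoop land cnt rows cols fuel w V c).2 =
        (pvCount cnt (pvBfsLoop land cnt rows cols fuel w V c).1 : Int) := by
  intro fuel
  induction fuel with
  | zero =>
    intro w V c h1 h2 h4 h5 h6 h7 h8
    have hw : w = [] := by
      cases w with
      | nil => rfl
      | cons a l => simp at h8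
    subst hw
    refine ⟨h1, h2, h5, fun p hp => hp, ?_, h7⟩
    intro p hp q hq hqinb hql
    rcases h6 p hp with hmem | hcl
    · simp at hmem
    · exact hcl q hq hqinb hql
  | succ fuel ih =>
    intro w V c h1 h2 h4 h5 h6 h7 h8
    match w with
    | [] =>
      refine ⟨h1, h2, h5, fun p hp => hp, ?_, h7⟩
      intro p hp q hq hqinb hql
      rcases h6 p hp with hmem | hcl
      · simp at hmem
      · exact hcl q hq hqinb hql
    | (cy, cx) :: w' =>
      obtain ⟨n_sh, n_pt, n_prov, n_scan, n_c, n_cnt, n_z⟩ :=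
        pvNstepL_spec land rows cols cnt hcnt (pvNbrs (cy, cx)) V c h1
      set ns := (pvNstepL land cnt rows cols (pvNbrs (cy, cx)) V c).1 with hns
      set V' := (pvNstepL land cnt rows cols (pvNbrs (cy, cx)) V c).2.1 with hV'
      set c' := (pvNstepL land cnt rows cols (pvNbrs (cy, cx)) V c).2.2 with hc'
      have hstep : pvBfsLoop land cnt rows cols (fuel + 1) ((cy, cx) :: w') V c =
          pvBfsLoop land cnt rows cols fuel (w' ++ ns) V' c' := by
        show pvBfsLoop land cnt rows cols fuel
            ((PySem.List.pyRange 0 4 1).foldl (pvBfsStep land cnt rows cols cy cx) (w', V, c)).1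
            ((PySem.List.pyRange 0 4 1).foldl (pvBfsStep land cnt rows cols cy cx) (w', V, c)).2.1
            ((PySem.List.pyRange 0 4 1).foldl (pvBfsStep land cnt rows cols cy cx) (w', V, c)).2.2
          = _
        rw [pvBfsFold_eq, pvBfold_factor]
      have hnz : ∀ q : Int × Int, pvInb rows cols q → pvMget V q.1 q.2 ≠ 0 →
          pvMget V' q.1 q.2 ≠ 0 := by
        intro q hq h0
        rw [n_pt q.1 q.2 hq]
        split
        · omega
        · exact h0
      have hmono : ∀ q, pvM rows cols cnt V q → pvM rows cols cnt V' q := by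
        intro q hq
        refine ⟨hq.1, ?_⟩
        rw [n_pt q.1 q.2 hq.1]
        split
        · rfl
        · exact hq.2
      have hnewM : ∀ q ∈ ns, pvM rows cols cnt V' q := by
        intro q hq
        have hinb := (n_prov q hq).2.1
        refine ⟨hinb, ?_⟩
        rw [n_pt q.1 q.2 hinb, if_pos hq]
      have hV0zero : ∀ q : Int × Int, pvInb rows cols q → pvMget V q.1 q.2 = 0 →
          pvMget V0 q.1 q.2 = 0 := by
        intro q hq h0
        rcases h2 q.1 q.2 hq with he | ⟨he, -, -⟩
        · rw [← he]; exact h0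
        · exact he
      have H2' : ∀ y x : Int, pvInb rows cols (y, x) → pvMget V' y x = pvMget V0 y x ∨
          (pvMget V0 y x = 0 ∧ pvMget land y x = 1 ∧ pvMget V' y x = cnt) := by
        intro y x hinb
        rw [n_pt y x hinb]
        by_cases hm : (y, x) ∈ ns
        · obtain ⟨-, -, hq0, hql⟩ := n_prov _ hm
          exact Or.inr ⟨hV0zero (y, x) hinb hq0, hql, by rw [if_pos hm]⟩
        · rw [if_neg hm]
          exact h2 y x hinb
      have H4' : ∀ q ∈ w' ++ ns, pvM rows cols cnt V' q := by
        intro q hq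
        rcases List.mem_append.mp hq with hq | hq
        · exact hmono q (h4 q (List.mem_cons_of_mem _ hq))
        · exact hnewM q hq
      have H5' : ∀ q, pvM rows cols cnt V' q → pvReach land rows cols V0 s q := by
        intro q hq
        by_cases hm : q ∈ ns
        · obtain ⟨hnb, hinb, hq0, hql⟩ := n_prov _ hm
          have hreach_p : pvReach land rows cols V0 s (cy, cx) :=
            h5 (cy, cx) (h4 (cy, cx) List.mem_cons_self)
          exact pvReach.step hreach_p hnb ⟨hinb, hV0zero q hinb hq0, hql⟩
        · apply h5
          refine ⟨hq.1, ?_⟩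
          have := hq.2
          rw [n_pt q.1 q.2 hq.1, if_neg (by simpa using hm)] at this
          exact this
      have H6' : ∀ q, pvM rows cols cnt V' q → q ∈ w' ++ ns ∨
          ∀ r ∈ pvNbrs q, pvInb rows cols r → pvMget land r.1 r.2 = 1 →
            pvMget V' r.1 r.2 ≠ 0 := by
        intro q hq
        by_cases hqV : pvM rows cols cnt V q
        · rcases h6 q hqV with hmem | hcl
          · rcases List.mem_cons.mp hmem with rfl | hmem'
            · exact Or.inr (fun r hr hrinb hrl => n_scan r hr hrinb hrl)
            · exact Or.inl (List.mem_append.mpr (Or.inl hmem'))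
          · exact Or.inr (fun r hr hrinb hrl => hnz r hrinb (hcl r hr hrinb hrl))
        · have hm : q ∈ ns := by
            by_contra hm
            apply hqV
            refine ⟨hq.1, ?_⟩
            have := hq.2
            rw [n_pt q.1 q.2 hq.1, if_neg (by simpa using hm)] at this
            exact this
          exact Or.inl (List.mem_append.mpr (Or.inr hm))
      have H7' : c' = (pvCount cnt V' : Int) := by
        rw [n_c, n_cnt, h7]
        push_cast
        ring
      have H8' : pvCount 0 V' + (w' ++ ns).length ≤ fuel := by
        have hlen : (w' ++ ns).length = w'.length + ns.length := by
          simp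
        simp only [List.length_cons] at h8
        omega
      rw [hstep]
      obtain ⟨k1, k2, k3, k4, k5, k6⟩ :=
        ih (w' ++ ns) V' c' n_sh H2' H4' H5' H6' H7' H8'
      exact ⟨k1, k2, k3, fun q hq => k4 q (hmono q hq), k5, k6⟩

lemma pvBfs_spec (land : List (List Int)) (rows cols cnt : Int) (V : List (List Int))
    (y x : Int) (hcnt : 1 ≤ cnt) (hsh : pvSh rows cols V)
    (hrange : ∀ y' x' : Int, pvInb rows cols (y', x') →
      0 ≤ pvMget V y' x' ∧ pvMget V y' x' < cnt)
    (hfree : pvFreeAt land rows cols V (y, x)) :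
    pvSh rows cols (pvBfs y x V land cnt rows cols).1 ∧
    (∀ p : Int × Int, pvInb rows cols p →
      (pvReach land rows cols V (y, x) p →
        pvMget (pvBfs y x V land cnt rows cols).1 p.1 p.2 = cnt) ∧
      (¬ pvReach land rows cols V (y, x) p →
        pvMget (pvBfs y x V land cnt rows cols).1 p.1 p.2 = pvMget V p.1 p.2)) ∧
    (pvBfs y x V land cnt rows cols).2 =
      (pvCount cnt (pvBfs y x V land cnt rows cols).1 : Int) := by
  obtain ⟨hsinb, hs0, hsl⟩ := hfree
  have hself : pvMget (pvMset V y x cnt) y x = cnt := pvMget_pvMset_self hsh hsinb cnt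
  have hcnt0 : cnt ≠ 0 := by omega
  have hmark := pvCount_pvMset_mark hsh hsinb hcnt0 hs0
  have heqs : ∀ p : Int × Int, pvInb rows cols p → pvM rows cols cnt (pvMset V y x cnt) p →
      p = (y, x) := by
    intro p hpinb hp
    by_contra hne
    have := hp.2
    rw [pvMget_pvMset_ne hsinb.1 hsinb.2.2.1 hpinb.1 hpinb.2.2.1 (by simpa using hne) cnt] at this
    have := (hrange p.1 p.2 hpinb).2
    omega
  have hzcnt : pvCount cnt V = 0 := by
    apply pvCount_eq_zero hsh
    intro y' x' hinb
    have := hrange y' x' hinb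
    omega
  unfold pvBfs
  obtain ⟨k1, k2, k3, k4, k5, k6⟩ := pvBfsLoop_inv land rows cols cnt V (y, x) hcnt
    (cols.toNat * rows.toNat + 1) [(y, x)] (pvMset V y x cnt) 1
    (pvSh_pvMset hsh hsinb cnt)
    (by
      intro y' x' hinb
      by_cases hys : ((y', x') : Int × Int) = (y, x)
      · obtain ⟨rfl, rfl⟩ : y' = y ∧ x' = x := ⟨congrArg Prod.fst hys, congrArg Prod.snd hys⟩
        exact Or.inr ⟨hs0, hsl, hself⟩
      · rw [pvMget_pvMset_ne hsinb.1 hsinb.2.2.1 hinb.1 hinb.2.2.1 (by simpa using hys) cnt]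
        exact Or.inl rfl)
    (by
      intro p hp
      have : p = (y, x) := by simpa using hp
      subst this
      exact ⟨hsinb, hself⟩)
    (by
      intro p hp
      have := heqs p hp.1 hp
      subst this
      exact pvReach.base ⟨hsinb, hs0, hsl⟩)
    (by
      intro p hp
      exact Or.inl (by simp [heqs p hp.1 hp]))
    (by
      have := hmark.1
      omega)
    (by
      have hle := pvCount_le_size hsh (0 : Int)
      have := hmark.2
      simp only [List.length_cons, List.length_nil]
      omega)
  refine ⟨k1, ?_, k6⟩
  have hseedM : pvM rows cols cnt (pvBfsLoop land cnt rows cols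
      (cols.toNat * rows.toNat + 1) [(y, x)] (pvMset V y x cnt) 1).1 (y, x) :=
    k4 (y, x) ⟨hsinb, hself⟩
  have hreach_marked : ∀ p, pvReach land rows cols V (y, x) p →
      pvM rows cols cnt (pvBfsLoop land cnt rows cols
        (cols.toNat * rows.toNat + 1) [(y, x)] (pvMset V y x cnt) 1).1 p := by
    intro p hp
    induction hp with
    | base hf => exact hseedM
    | @step a b ha hb hf iha =>
      obtain ⟨hbinb, hb0, hbl⟩ := hf
      have hnzb := k5 a iha b hb hbinb hbl
      rcases k2 b.1 b.2 hbinb with he | ⟨-, -, he⟩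
      · rw [he] at hnzb
        exact absurd hb0 hnzb
      · exact ⟨hbinb, he⟩
  intro p hinb
  constructor
  · intro hr
    exact (hreach_marked p hr).2
  · intro hr
    rcases k2 p.1 p.2 hinb with he | ⟨h0, hl, he⟩
    · exact he
    · exact absurd (k3 p ⟨hinb, he⟩) hr

-- ---------- phase 1 of A: the scan invariant ----------

def pvInv (land : List (List Int)) (rows cols : Int)
    (st : List (List Int) × PySem.Dict Int Int × Int) : Prop :=
  pvSh rows cols st.1 ∧ 1 ≤ st.2.2 ∧
  (∀ p : Int × Int, pvInb rows cols p → 0 ≤ pvMget st.1 p.1 p.2 ∧ pvMget st.1 p.1 p.2 < st.2.2) ∧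
  (∀ p : Int × Int, pvInb rows cols p → pvMget st.1 p.1 p.2 ≠ 0 → pvMget land p.1 p.2 = 1) ∧
  (∀ p q : Int × Int, pvInb rows cols p → pvMget st.1 p.1 p.2 ≠ 0 →
    pvConn land rows cols p q → pvMget st.1 q.1 q.2 = pvMget st.1 p.1 p.2) ∧
  (∀ p q : Int × Int, pvInb rows cols p → pvInb rows cols q → pvMget st.1 p.1 p.2 ≠ 0 →
    pvMget st.1 p.1 p.2 = pvMget st.1 q.1 q.2 → pvConn land rows cols p q) ∧
  (∀ l : Int, 1 ≤ l → l < st.2.2 → st.2.1.getD l 0 = (pvCount l st.1 : Int))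

lemma pvInv_closure {land : List (List Int)} {rows cols : Int}
    {st : List (List Int) × PySem.Dict Int Int × Int} (h : pvInv land rows cols st) :
    ∀ p, pvInb rows cols p → pvMget st.1 p.1 p.2 ≠ 0 →
      ∀ q ∈ pvNbrs p, pvGood land rows cols q → pvMget st.1 q.1 q.2 ≠ 0 := by
  obtain ⟨-, -, -, h4, h5, -, -⟩ := h
  intro p hp h0 q hq hg
  have hconn : pvConn land rows cols p q :=
    pvConn.step (pvConn.base ⟨hp, h4 p hp h0⟩) hq hg
  rw [h5 p q hp h0 hconn]
  exact h0

lemma pvCellA_inv (land : List (List Int)) (rows cols x y : Int)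
    (hx : 0 ≤ x ∧ x < rows) (hy : 0 ≤ y ∧ y < cols)
    (st : List (List Int) × PySem.Dict Int Int × Int) (h : pvInv land rows cols st) :
    pvInv land rows cols (pvCellA land rows cols st x y) ∧
    (∀ p : Int × Int, pvInb rows cols p → pvMget st.1 p.1 p.2 ≠ 0 →
      pvMget (pvCellA land rows cols st x y).1 p.1 p.2 = pvMget st.1 p.1 p.2) ∧
    (pvMget land y x = 1 → pvMget (pvCellA land rows cols st x y).1 y x ≠ 0) := by
  obtain ⟨hsh, hcnt, hrange, hland, hconst, hfib, hval⟩ := h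
  by_cases hc : pvMget st.1 y x = 0 ∧ pvMget land y x = 1
  · have hstep : pvCellA land rows cols st x y =
        ((pvBfs y x st.1 land st.2.2 rows cols).1,
          st.2.1.insert st.2.2 (pvBfs y x st.1 land st.2.2 rows cols).2, st.2.2 + 1) := by
      unfold pvCellA
      rw [if_pos hc]
    rw [hstep]
    have hfree : pvFreeAt land rows cols st.1 (y, x) :=
      ⟨⟨hy.1, hy.2, hx.1, hx.2⟩, hc.1, hc.2⟩
    obtain ⟨bsh, bpt, bcount⟩ :=
      pvBfs_spec land rows cols st.2.2 st.1 y x hcnt hsh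
        (fun y' x' h => hrange (y', x') h) hfree
    have hiff : ∀ p, pvReach land rows cols st.1 (y, x) p ↔ pvConn land rows cols (y, x) p :=
      pvReach_iff_conn (pvInv_closure ⟨hsh, hcnt, hrange, hland, hconst, hfib, hval⟩) hfree
    set V' := (pvBfs y x st.1 land st.2.2 rows cols).1 with hV'
    set r2 := (pvBfs y x st.1 land st.2.2 rows cols).2 with hr2
    have hpt : ∀ p : Int × Int, pvInb rows cols p →
        (pvConn land rows cols (y, x) p → pvMget V' p.1 p.2 = st.2.2) ∧
        (¬ pvConn land rows cols (y, x) p → pvMget V' p.1 p.2 = pvMget st.1 p.1 p.2) := by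
      intro p hp
      obtain ⟨b1, b2⟩ := bpt p hp
      exact ⟨fun hcn => b1 ((hiff p).mpr hcn), fun hcn => b2 (fun hr => hcn ((hiff p).mp hr))⟩
    have hfill : ∀ p : Int × Int, pvInb rows cols p →
        pvMget V' p.1 p.2 = pvMget st.1 p.1 p.2 ∨
          (pvMget st.1 p.1 p.2 = 0 ∧ pvMget V' p.1 p.2 = st.2.2) := by
      intro p hp
      by_cases hcn : pvConn land rows cols (y, x) p
      · refine Or.inr ⟨?_, (hpt p hp).1 hcn⟩
        by_contra h0
        have := (hiff p).mpr hcn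
        exact absurd (pvReach_free this).2.1 h0
      · exact Or.inl ((hpt p hp).2 hcn)
    have hnewland : ∀ p : Int × Int, pvInb rows cols p → pvMget V' p.1 p.2 ≠ 0 →
        pvMget land p.1 p.2 = 1 := by
      intro p hp h0
      rcases hfill p hp with he | ⟨-, -⟩
      · exact hland p hp (he ▸ h0)
      · by_cases hcn : pvConn land rows cols (y, x) p
        · exact (pvConn_good_right hcn).2
        · rcases hfill p hp with he | ⟨h1, h2⟩
          · exact hland p hp (he ▸ h0)
          · exact absurd hcn (by
              by_contra hcn'
              rw [(hpt p hp).2 hcn', h1] at h0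
              exact h0 rfl)
    have hmarked_conn : ∀ p : Int × Int, pvInb rows cols p → pvMget V' p.1 p.2 = st.2.2 →
        pvConn land rows cols (y, x) p := by
      intro p hp hm
      by_contra hcn
      rw [(hpt p hp).2 hcn] at hm
      have := (hrange p hp).2
      omega
    refine ⟨⟨bsh, by show (1 : Int) ≤ st.2.2 + 1; omega, ?_, hnewland, ?_, ?_, ?_⟩, ?_, ?_⟩
    · -- range
      intro p hp
      show 0 ≤ pvMget V' p.1 p.2 ∧ pvMget V' p.1 p.2 < st.2.2 + 1
      rcases hfill p hp with he | ⟨-, he⟩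
      · have := hrange p hp
        omega
      · omega
    · -- label constant on components
      intro p q hp h0 hconn'
      show pvMget V' q.1 q.2 = pvMget V' p.1 p.2
      have h0 : pvMget V' p.1 p.2 ≠ 0 := h0
      have hq : pvInb rows cols q := (pvConn_good_right hconn').1
      by_cases hcn : pvConn land rows cols (y, x) p
      · have hcq : pvConn land rows cols (y, x) q := pvConn_trans hcn hconn'
        rw [(hpt p hp).1 hcn, (hpt q hq).1 hcq]
      · have hpe := (hpt p hp).2 hcn
        have hcnq : ¬ pvConn land rows cols (y, x) q := by
          intro hcq
          exact hcn (pvConn_trans hcq (pvConn_symm hconn'))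
        rw [hpe, (hpt q hq).2 hcnq]
        exact hconst p q hp (hpe ▸ h0) hconn'
    · -- equal labels are connected
      intro p q hp hq h0 he
      have h0 : pvMget V' p.1 p.2 ≠ 0 := h0
      have he : pvMget V' p.1 p.2 = pvMget V' q.1 q.2 := he
      by_cases hcnp : pvConn land rows cols (y, x) p
      · have hq' : pvMget V' q.1 q.2 = st.2.2 := by
          rw [← he, (hpt p hp).1 hcnp]
        exact pvConn_trans (pvConn_symm hcnp) (hmarked_conn q hq hq')
      · have hpe := (hpt p hp).2 hcnp
        have hcnq : ¬ pvConn land rows cols (y, x) q := by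
          intro hcq
          rw [hpe] at he
          have := (hrange p hp).2
          rw [(hpt q hq).1 hcq] at he
          omega
        have hqe := (hpt q hq).2 hcnq
        exact hfib p q hp hq (hpe ▸ h0) (by rw [← hpe, ← hqe]; exact he)
    · -- the size dictionary
      intro l hl1 hl2
      show (st.2.1.insert st.2.2 r2).getD l 0 = (pvCount l V' : Int)
      by_cases hle : l = st.2.2
      · subst hle
        rw [PySem.Dict.getD_insert_self]
        exact bcount
      · have hl2' : l < st.2.2 + 1 := hl2
        rw [PySem.Dict.getD_insert, if_neg hle, hval l hl1 (by omega)]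
        congr 1
        exact (pvCount_congr_fill hsh bsh hfill (by omega) hle).symm
    · -- old nonzero cells keep their value
      intro p hp h0
      show pvMget V' p.1 p.2 = pvMget st.1 p.1 p.2
      rcases hfill p hp with he | ⟨he, -⟩
      · exact he
      · exact absurd he h0
    · -- the scanned cell is handled
      intro hl
      show pvMget V' y x ≠ 0
      have : pvMget V' y x = st.2.2 :=
        (hpt (y, x) ⟨hy.1, hy.2, hx.1, hx.2⟩).1 (pvConn.base ⟨⟨hy.1, hy.2, hx.1, hx.2⟩, hl⟩)
      omega
  · have hstep : pvCellA land rows cols st x y = st := by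
      unfold pvCellA
      rw [if_neg hc]
    rw [hstep]
    refine ⟨⟨hsh, hcnt, hrange, hland, hconst, hfib, hval⟩, fun p _ _ => rfl, ?_⟩
    intro hl h0
    exact hc ⟨h0, hl⟩

lemma pvScanCol_inv (land : List (List Int)) (rows cols x : Int) (hx : 0 ≤ x ∧ x < rows) :
    ∀ (ys : List Int), (∀ y ∈ ys, 0 ≤ y ∧ y < cols) →
    ∀ (st : List (List Int) × PySem.Dict Int Int × Int), pvInv land rows cols st →
      pvInv land rows cols (ys.foldl (fun st y => pvCellA land rows cols st x y) st) ∧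
      (∀ p : Int × Int, pvInb rows cols p → pvMget st.1 p.1 p.2 ≠ 0 →
        pvMget (ys.foldl (fun st y => pvCellA land rows cols st x y) st).1 p.1 p.2 =
          pvMget st.1 p.1 p.2) ∧
      (∀ y ∈ ys, pvMget land y x = 1 →
        pvMget (ys.foldl (fun st y => pvCellA land rows cols st x y) st).1 y x ≠ 0) := by
  intro ys
  induction ys with
  | nil =>
    intro _ st h
    refine ⟨h, fun p _ _ => rfl, ?_⟩
    intro y hy
    simp at hy
  | cons y ys ih =>
    intro hmem st h
    have hy := hmem y List.mem_cons_self
    obtain ⟨h1, h2, h3⟩ := pvCellA_inv land rows cols x y hx hy st h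
    simp only [List.foldl_cons]
    obtain ⟨i1, i2, i3⟩ := ih (fun y' hy' => hmem y' (List.mem_cons_of_mem _ hy')) _ h1
    refine ⟨i1, ?_, ?_⟩
    · intro p hp h0
      rw [i2 p hp (by rw [h2 p hp h0]; exact h0), h2 p hp h0]
    · intro y' hy' hl
      rcases List.mem_cons.mp hy' with rfl | hy''
      · have hyx : pvInb rows cols (y', x) := ⟨hy.1, hy.2, hx.1, hx.2⟩
        have := h3 hl
        rw [i2 (y', x) hyx this]
        exact this
      · exact i3 y' hy'' hl

lemma pvScan_inv (land : List (List Int)) (rows cols : Int) :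
    ∀ (xs : List Int), (∀ x ∈ xs, 0 ≤ x ∧ x < rows) →
    ∀ (st : List (List Int) × PySem.Dict Int Int × Int), pvInv land rows cols st →
      pvInv land rows cols (xs.foldl (fun st x =>
        (PySem.List.pyRange 0 cols 1).foldl (fun st y => pvCellA land rows cols st x y) st) st) ∧
      (∀ p : Int × Int, pvInb rows cols p → pvMget st.1 p.1 p.2 ≠ 0 →
        pvMget (xs.foldl (fun st x =>
          (PySem.List.pyRange 0 cols 1).foldl (fun st y => pvCellA land rows cols st x y) st)
          st).1 p.1 p.2 = pvMget st.1 p.1 p.2) ∧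
      (∀ x ∈ xs, ∀ y : Int, 0 ≤ y → y < cols → pvMget land y x = 1 →
        pvMget (xs.foldl (fun st x =>
          (PySem.List.pyRange 0 cols 1).foldl (fun st y => pvCellA land rows cols st x y) st)
          st).1 y x ≠ 0) := by
  intro xs
  induction xs with
  | nil =>
    intro _ st h
    refine ⟨h, fun p _ _ => rfl, ?_⟩
    intro x hx
    simp at hx
  | cons x xs ih =>
    intro hmem st h
    have hx := hmem x List.mem_cons_self
    have hys : ∀ y ∈ PySem.List.pyRange 0 cols 1, 0 ≤ y ∧ y < cols := by
      intro y hy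
      rw [PySem.List.mem_pyRange_one] at hy
      exact hy
    obtain ⟨h1, h2, h3⟩ := pvScanCol_inv land rows cols x hx (PySem.List.pyRange 0 cols 1) hys st h
    simp only [List.foldl_cons]
    obtain ⟨i1, i2, i3⟩ := ih (fun x' hx' => hmem x' (List.mem_cons_of_mem _ hx')) _ h1
    refine ⟨i1, ?_, ?_⟩
    · intro p hp h0
      rw [i2 p hp (by rw [h2 p hp h0]; exact h0), h2 p hp h0]
    · intro x' hx' y hy1 hy2 hl
      rcases List.mem_cons.mp hx' with rfl | hx''
      · have hyx : pvInb rows cols (y, x') := ⟨hy1, hy2, hx.1, hx.2⟩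
        have := h3 y (by rw [PySem.List.mem_pyRange_one]; exact ⟨hy1, hy2⟩) hl
        rw [i2 (y, x') hyx this]
        exact this
      · exact i3 x' hx'' y hy1 hy2 hl

-- ---------- the answer loop of A: distinct labels of a column ----------

def pvColLabels (cols : Int) (V : List (List Int)) (x : Int) : List Int :=
  ((PySem.List.pyRange 0 cols 1).map (fun y => pvMget V y x)).filter (fun c => !(c == 0))

lemma pvTmp_fold (V : List (List Int)) (x : Int) :
    ∀ (ys : List Int) (t : PySem.Set Int),
      ys.foldl (fun (t : PySem.Set Int) y =>
        if pvMget V y x ≠ 0 then PySem.Set.add t (pvMget V y x) else t) t =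
      PySem.Set.update t ((ys.map (fun y => pvMget V y x)).filter (fun c => !(c == 0))) := by
  intro ys
  induction ys with
  | nil => intro t; simp [PySem.Set.update]
  | cons y ys ih =>
    intro t
    simp only [List.foldl_cons, List.map_cons, List.filter_cons]
    by_cases h : pvMget V y x = 0
    · rw [if_neg (by simp [h]),
        show (!(pvMget V y x == 0)) = false from by simp [h], if_neg (by simp)]
      exact ih t
    · rw [if_pos h, show (!(pvMget V y x == 0)) = true from by simp [h], if_pos rfl,
        PySem.Set.update_cons]
      exact ih (t.add (pvMget V y x))

lemma pvColA_char (cols : Int) (V : List (List Int)) (val : PySem.Dict Int Int) (x : Int) :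
    pvColA cols V val x =
      ((PySem.Set.ofList (pvColLabels cols V x)).map (fun c => val.getD c 0)).sum := by
  unfold pvColA pvColLabels
  rw [show (PySem.Set.empty : PySem.Set Int) = ([] : PySem.Set Int) from rfl]
  rw [pvTmp_fold, PySem.Set.update_nil_left, PySem.List.foldl_add]
  simp

lemma mem_pvColLabels {cols : Int} {V : List (List Int)} {x l : Int} :
    l ∈ pvColLabels cols V x ↔ (∃ y, 0 ≤ y ∧ y < cols ∧ pvMget V y x = l) ∧ l ≠ 0 := by
  simp only [pvColLabels, List.mem_filter, List.mem_map, PySem.List.mem_pyRange_one]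
  constructor
  · rintro ⟨⟨y, ⟨hy1, hy2⟩, rfl⟩, hne⟩
    exact ⟨⟨y, hy1, hy2, rfl⟩, by simpa using hne⟩
  · rintro ⟨⟨y, hy1, hy2, hm⟩, hne⟩
    exact ⟨⟨y, ⟨hy1, hy2⟩, hm⟩, by simpa using hne⟩

-- ---------- the per-column flood of B ----------

def pvCStep (land : List (List Int)) (rows cols : Int)
    (s : List (Int × Int) × PySem.Set (Int × Int)) (p : Int × Int) :
    List (Int × Int) × PySem.Set (Int × Int) :=
  if 0 ≤ p.1 ∧ p.1 < cols ∧ 0 ≤ p.2 ∧ p.2 < rows ∧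
      pvMget land p.1 p.2 = 1 ∧ PySem.Set.contains s.2 p = false then
    (p :: s.1, PySem.Set.add s.2 p)
  else s

lemma pvColLoop_succ (land : List (List Int)) (rows cols : Int) (fuel : Nat)
    (cy cx : Int) (st : List (Int × Int)) (seen : PySem.Set (Int × Int)) :
    pvColLoop land rows cols (fuel + 1) ((cy, cx) :: st) seen =
      pvColLoop land rows cols fuel
        ((pvNbrs (cy, cx)).foldl (pvCStep land rows cols) (st, seen)).1
        ((pvNbrs (cy, cx)).foldl (pvCStep land rows cols) (st, seen)).2 := rfl

lemma pvNotContains {s : PySem.Set (Int × Int)} {p : Int × Int} :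
    PySem.Set.contains s p = false ↔ p ∉ (s : List (Int × Int)) := by
  rw [PySem.Set.contains_eq_listContains]
  simp

lemma pvCFold_spec (land : List (List Int)) (rows cols : Int) :
    ∀ (L : List (Int × Int)) (w : List (Int × Int)) (S : PySem.Set (Int × Int)),
      (S : List (Int × Int)).Nodup →
      ((L.foldl (pvCStep land rows cols) (w, S)).2 : List (Int × Int)).Nodup ∧
      (∀ p : Int × Int, p ∈ ((L.foldl (pvCStep land rows cols) (w, S)).2 : List (Int × Int)) ↔
        p ∈ (S : List (Int × Int)) ∨
          (p ∈ L ∧ pvGood land rows cols p ∧ p ∉ (S : List (Int × Int)))) ∧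
      (∀ p : Int × Int, p ∈ (L.foldl (pvCStep land rows cols) (w, S)).1 ↔
        p ∈ w ∨ (p ∈ ((L.foldl (pvCStep land rows cols) (w, S)).2 : List (Int × Int)) ∧
          p ∉ (S : List (Int × Int)))) ∧
      (L.foldl (pvCStep land rows cols) (w, S)).1.length + (S : List (Int × Int)).length =
        w.length + ((L.foldl (pvCStep land rows cols) (w, S)).2 : List (Int × Int)).length := by
  intro L
  induction L with
  | nil =>
    intro w S hnd
    exact ⟨hnd, fun p => by simp, fun p => by simp, by simp⟩
  | cons q L ih =>
    intro w S hnd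
    simp only [List.foldl_cons]
    by_cases hc : 0 ≤ q.1 ∧ q.1 < cols ∧ 0 ≤ q.2 ∧ q.2 < rows ∧
        pvMget land q.1 q.2 = 1 ∧ PySem.Set.contains S q = false
    · have hq_good : pvGood land rows cols q := ⟨⟨hc.1, hc.2.1, hc.2.2.1, hc.2.2.2.1⟩, hc.2.2.2.2.1⟩
      have hq_nm : q ∉ (S : List (Int × Int)) := pvNotContains.mp hc.2.2.2.2.2
      have hstep : pvCStep land rows cols (w, S) q = (q :: w, PySem.Set.add S q) := by
        unfold pvCStep
        rw [if_pos hc]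
      rw [hstep]
      have hadd : (PySem.Set.add S q : List (Int × Int)) = (S : List (Int × Int)) ++ [q] :=
        PySem.Set.add_of_not_mem hq_nm
      obtain ⟨i1, i2, i3, i4⟩ := ih (q :: w) (PySem.Set.add S q) (PySem.Set.nodup_add S q hnd)
      have hmemadd : ∀ p : Int × Int, p ∈ (PySem.Set.add S q : List (Int × Int)) ↔
          p ∈ (S : List (Int × Int)) ∨ p = q := fun p => PySem.Set.mem_add S q p
      refine ⟨i1, ?_, ?_, ?_⟩
      · intro p
        rw [i2 p]
        constructor
        · rintro (hp | ⟨hpL, hpg, hpn⟩)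
          · rcases (hmemadd p).mp hp with hp | rfl
            · exact Or.inl hp
            · exact Or.inr ⟨List.mem_cons_self, hq_good, hq_nm⟩
          · exact Or.inr ⟨List.mem_cons_of_mem _ hpL, hpg, fun hm => hpn ((hmemadd p).mpr (Or.inl hm))⟩
        · rintro (hp | ⟨hpL, hpg, hpn⟩)
          · exact Or.inl ((hmemadd p).mpr (Or.inl hp))
          · by_cases hpq : p = q
            · exact Or.inl ((hmemadd p).mpr (Or.inr hpq))
            · rcases List.mem_cons.mp hpL with rfl | hpL'
              · exact absurd rfl hpq
              · exact Or.inr ⟨hpL', hpg, fun hm => by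
                  rcases (hmemadd p).mp hm with hm | hm
                  · exact hpn hm
                  · exact hpq hm⟩
      · intro p
        rw [i3 p]
        constructor
        · rintro (hp | ⟨hp2, hpn⟩)
          · rcases List.mem_cons.mp hp with rfl | hpw
            · exact Or.inr ⟨(i2 p).mpr (Or.inl ((hmemadd p).mpr (Or.inr rfl))), hq_nm⟩
            · exact Or.inl hpw
          · exact Or.inr ⟨hp2, fun hm => hpn ((hmemadd p).mpr (Or.inl hm))⟩
        · rintro (hpw | ⟨hp2, hpn⟩)
          · exact Or.inl (List.mem_cons_of_mem _ hpw)
          · by_cases hpq : p = q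
            · exact Or.inl (by rw [hpq]; exact List.mem_cons_self)
            · refine Or.inr ⟨hp2, fun hm => ?_⟩
              rcases (hmemadd p).mp hm with hm | hm
              · exact hpn hm
              · exact hpq hm
      · have hlenadd : (PySem.Set.add S q : List (Int × Int)).length =
            (S : List (Int × Int)).length + 1 := by
          rw [hadd]; simp
        simp only [List.length_cons] at i4
        omega
    · have hstep : pvCStep land rows cols (w, S) q = (w, S) := by
        simp only [pvCStep, if_neg hc]
      rw [hstep]
      obtain ⟨i1, i2, i3, i4⟩ := ih w S hnd
      refine ⟨i1, ?_, i3, i4⟩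
      intro p
      rw [i2 p]
      constructor
      · rintro (hp | ⟨hpL, hpg, hpn⟩)
        · exact Or.inl hp
        · exact Or.inr ⟨List.mem_cons_of_mem _ hpL, hpg, hpn⟩
      · rintro (hp | ⟨hpL, hpg, hpn⟩)
        · exact Or.inl hp
        · rcases List.mem_cons.mp hpL with rfl | hpL'
          · exfalso
            apply hc
            refine ⟨hpg.1.1, hpg.1.2.1, hpg.1.2.2.1, hpg.1.2.2.2, hpg.2, pvNotContains.mpr hpn⟩
          · exact Or.inr ⟨hpL', hpg, hpn⟩

lemma pvSetLen_le (rows cols : Int) (S : List (Int × Int)) (hnd : S.Nodup)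
    (hmem : ∀ p ∈ S, pvInb rows cols p) : S.length ≤ cols.toNat * rows.toNat := by
  have h1 : S.toFinset.card = S.length := List.toFinset_card_of_nodup hnd
  have h2 : S.toFinset ⊆ pvCells rows cols := by
    intro p hp
    rw [mem_pvCells]
    exact hmem p (List.mem_toFinset.mp hp)
  have := Finset.card_le_card h2
  rw [h1, pvCells_card] at this
  exact this

lemma pvColLoop_inv (land : List (List Int)) (rows cols : Int) (Sd : List (Int × Int)) :
    ∀ (fuel : Nat) (w : List (Int × Int)) (S : PySem.Set (Int × Int)),
      (S : List (Int × Int)).Nodup →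
      (∀ p ∈ (S : List (Int × Int)), pvGood land rows cols p ∧
        ∃ s ∈ Sd, pvConn land rows cols s p) →
      (∀ p ∈ w, p ∈ (S : List (Int × Int))) →
      (∀ p ∈ (S : List (Int × Int)), p ∈ w ∨
        ∀ q ∈ pvNbrs p, pvGood land rows cols q → q ∈ (S : List (Int × Int))) →
      (∀ s ∈ Sd, s ∈ (S : List (Int × Int))) →
      cols.toNat * rows.toNat + w.length ≤ fuel + (S : List (Int × Int)).length →
      ((pvColLoop land rows cols fuel w S : List (Int × Int)).Nodup ∧
       (∀ p ∈ (pvColLoop land rows cols fuel w S : List (Int × Int)),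
         pvGood land rows cols p ∧ ∃ s ∈ Sd, pvConn land rows cols s p) ∧
       (∀ s ∈ Sd, s ∈ (pvColLoop land rows cols fuel w S : List (Int × Int))) ∧
       (∀ p ∈ (pvColLoop land rows cols fuel w S : List (Int × Int)),
         ∀ q ∈ pvNbrs p, pvGood land rows cols q →
           q ∈ (pvColLoop land rows cols fuel w S : List (Int × Int)))) := by
  intro fuel
  induction fuel with
  | zero =>
    intro w S hnd hgood hw hcl hSd hfuel
    have hSlen : (S : List (Int × Int)).length ≤ cols.toNat * rows.toNat :=
      pvSetLen_le rows cols S hnd (fun p hp => (hgood p hp).1.1)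
    have hwnil : w = [] := by
      cases w with
      | nil => rfl
      | cons a l => simp only [List.length_cons] at hfuel; omega
    subst hwnil
    refine ⟨hnd, hgood, hSd, ?_⟩
    intro p hp q hq hqg
    rcases hcl p hp with hm | hc
    · simp at hm
    · exact hc q hq hqg
  | succ fuel ih =>
    intro w S hnd hgood hw hcl hSd hfuel
    match w with
    | [] =>
      refine ⟨hnd, hgood, hSd, ?_⟩
      intro p hp q hq hqg
      rcases hcl p hp with hm | hc
      · simp at hm
      · exact hc q hq hqg
    | (cy, cx) :: w' =>
      rw [pvColLoop_succ]
      obtain ⟨f1, f2, f3, f4⟩ :=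
        pvCFold_spec land rows cols (pvNbrs (cy, cx)) w' S hnd
      set r := (pvNbrs (cy, cx)).foldl (pvCStep land rows cols) (w', S) with hr
      have hSsub : ∀ p ∈ (S : List (Int × Int)), p ∈ (r.2 : List (Int × Int)) :=
        fun p hp => (f2 p).mpr (Or.inl hp)
      have hcmem : (cy, cx) ∈ (S : List (Int × Int)) := hw (cy, cx) List.mem_cons_self
      have hgood' : ∀ p ∈ (r.2 : List (Int × Int)), pvGood land rows cols p ∧
          ∃ s ∈ Sd, pvConn land rows cols s p := by
        intro p hp
        rcases (f2 p).mp hp with hp | ⟨hpL, hpg, hpn⟩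
        · exact hgood p hp
        · obtain ⟨s, hs, hconn⟩ := (hgood (cy, cx) hcmem).2
          exact ⟨hpg, s, hs, pvConn.step hconn hpL hpg⟩
      have hw' : ∀ p ∈ r.1, p ∈ (r.2 : List (Int × Int)) := by
        intro p hp
        rcases (f3 p).mp hp with hp | ⟨hp2, -⟩
        · exact hSsub p (hw p (List.mem_cons_of_mem _ hp))
        · exact hp2
      have hcl' : ∀ p ∈ (r.2 : List (Int × Int)), p ∈ r.1 ∨
          ∀ q ∈ pvNbrs p, pvGood land rows cols q → q ∈ (r.2 : List (Int × Int)) := by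
        intro p hp
        rcases (f2 p).mp hp with hp | ⟨hpL, hpg, hpn⟩
        · rcases hcl p hp with hm | hc
          · rcases List.mem_cons.mp hm with he | hm'
            · right
              intro q hq hqg
              rw [show p = (cy, cx) from he] at hq
              by_cases hqS : q ∈ (S : List (Int × Int))
              · exact hSsub q hqS
              · exact (f2 q).mpr (Or.inr ⟨hq, hqg, hqS⟩)
            · exact Or.inl ((f3 p).mpr (Or.inl hm'))
          · exact Or.inr (fun q hq hqg => hSsub q (hc q hq hqg))
        · exact Or.inl ((f3 p).mpr (Or.inr ⟨hp, hpn⟩))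
      have hSd' : ∀ s ∈ Sd, s ∈ (r.2 : List (Int × Int)) :=
        fun s hs => hSsub s (hSd s hs)
      have hfuel' : cols.toNat * rows.toNat + r.1.length ≤
          fuel + (r.2 : List (Int × Int)).length := by
        simp only [List.length_cons] at hfuel
        omega
      exact ih r.1 r.2 f1 hgood' hw' hcl' hSd' hfuel'

lemma mem_pvStack {land : List (List Int)} {cols x : Int} {s : Int × Int} :
    s ∈ (PySem.List.pyRange 0 cols 1).filterMap
      (fun y => if pvMget land y x = 1 then some (y, x) else none) ↔
      0 ≤ s.1 ∧ s.1 < cols ∧ s.2 = x ∧ pvMget land s.1 x = 1 := by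
  rw [List.mem_filterMap]
  constructor
  · rintro ⟨y, hy, hif⟩
    rw [PySem.List.mem_pyRange_one] at hy
    by_cases hl : pvMget land y x = 1
    · rw [if_pos hl, Option.some.injEq] at hif
      subst hif
      exact ⟨hy.1, hy.2, rfl, hl⟩
    · rw [if_neg hl] at hif
      cases hif
  · rintro ⟨h1, h2, h3, h4⟩
    refine ⟨s.1, by rw [PySem.List.mem_pyRange_one]; exact ⟨h1, h2⟩, ?_⟩
    rw [if_pos h4, Option.some.injEq]
    rw [← h3]

lemma pvColSeen_spec (land : List (List Int)) (rows cols x : Int) (hx : 0 ≤ x ∧ x < rows) :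
    ((pvColLoop land rows cols (cols.toNat * rows.toNat + cols.toNat + 1)
        ((PySem.List.pyRange 0 cols 1).filterMap
          (fun y => if pvMget land y x = 1 then some (y, x) else none))
        (PySem.Set.ofList ((PySem.List.pyRange 0 cols 1).filterMap
          (fun y => if pvMget land y x = 1 then some (y, x) else none)))
      : List (Int × Int)).Nodup ∧
    (∀ p : Int × Int,
      p ∈ (pvColLoop land rows cols (cols.toNat * rows.toNat + cols.toNat + 1)
        ((PySem.List.pyRange 0 cols 1).filterMap
          (fun y => if pvMget land y x = 1 then some (y, x) else none))
        (PySem.Set.ofList ((PySem.List.pyRange 0 cols 1).filterMap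
          (fun y => if pvMget land y x = 1 then some (y, x) else none))) : List (Int × Int)) ↔
      pvGood land rows cols p ∧ ∃ y, 0 ≤ y ∧ y < cols ∧ pvMget land y x = 1 ∧
        pvConn land rows cols (y, x) p)) := by
  set Sd := (PySem.List.pyRange 0 cols 1).filterMap
    (fun y => if pvMget land y x = 1 then some (y, x) else none) with hSd
  have hSdGood : ∀ s ∈ Sd, pvGood land rows cols s := by
    intro s hs
    obtain ⟨h1, h2, h3, h4⟩ := mem_pvStack.mp hs
    refine ⟨⟨h1, h2, ?_, ?_⟩, ?_⟩ <;> rw [h3] <;> [exact hx.1; exact hx.2; exact h4]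
  have hSdmem : ∀ p : Int × Int, p ∈ (PySem.Set.ofList Sd : List (Int × Int)) ↔ p ∈ Sd :=
    fun p => PySem.Set.mem_ofList Sd p
  have hSdLen : Sd.length ≤ cols.toNat := by
    have h1 : Sd.length ≤ (PySem.List.pyRange 0 cols 1).length := List.length_filterMap_le _ _
    rw [PySem.List.length_pyRange_one] at h1
    omega
  obtain ⟨k1, k2, k3, k4⟩ := pvColLoop_inv land rows cols Sd
    (cols.toNat * rows.toNat + cols.toNat + 1) Sd (PySem.Set.ofList Sd)
    (PySem.Set.nodup_ofList Sd)
    (by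
      intro p hp
      rw [hSdmem] at hp
      exact ⟨hSdGood p hp, p, hp, pvConn.base (hSdGood p hp)⟩)
    (fun p hp => (hSdmem p).mpr hp)
    (fun p hp => Or.inl ((hSdmem p).mp hp))
    (fun s hs => (hSdmem s).mpr hs)
    (by
      have := PySem.Set.length_ofList_le (xs := Sd)
      omega)
  refine ⟨k1, ?_⟩
  intro p
  constructor
  · intro hp
    obtain ⟨hg, s, hs, hconn⟩ := k2 p hp
    obtain ⟨h1, h2, h3, h4⟩ := mem_pvStack.mp hs
    exact ⟨hg, s.1, h1, h2, h4, by rw [← h3]; exact hconn⟩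
  · rintro ⟨hg, y, hy1, hy2, hyl, hconn⟩
    have hseed : ((y, x) : Int × Int) ∈ Sd := mem_pvStack.mpr ⟨hy1, hy2, rfl, hyl⟩
    clear hg
    induction hconn with
    | base h => exact k3 _ hseed
    | @step q r hc hn hg' ih' => exact k4 q ih' r hn hg'

-- ---------- a column's value: both programs count the same cells ----------

lemma pvColValue (land : List (List Int)) (rows cols : Int)
    (st : List (List Int) × PySem.Dict Int Int × Int) (hinv : pvInv land rows cols st)
    (hall : ∀ p : Int × Int, pvGood land rows cols p → pvMget st.1 p.1 p.2 ≠ 0)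
    (x : Int) (hx : 0 ≤ x ∧ x < rows) :
    pvColA cols st.1 st.2.1 x =
      (((pvColLoop land rows cols (cols.toNat * rows.toNat + cols.toNat + 1)
        ((PySem.List.pyRange 0 cols 1).filterMap
          (fun y => if pvMget land y x = 1 then some (y, x) else none))
        (PySem.Set.ofList ((PySem.List.pyRange 0 cols 1).filterMap
          (fun y => if pvMget land y x = 1 then some (y, x) else none)))) :
            List (Int × Int)).length : Int) := by
  obtain ⟨hsh, hcnt, hrange, hland, hconst, hfib, hval⟩ := hinv
  obtain ⟨snd, smem⟩ := pvColSeen_spec land rows cols x hx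
  set S := (pvColLoop land rows cols (cols.toNat * rows.toNat + cols.toNat + 1)
    ((PySem.List.pyRange 0 cols 1).filterMap
      (fun y => if pvMget land y x = 1 then some (y, x) else none))
    (PySem.Set.ofList ((PySem.List.pyRange 0 cols 1).filterMap
      (fun y => if pvMget land y x = 1 then some (y, x) else none))) : List (Int × Int)) with hS
  -- A's column value as a Finset sum of component sizes
  rw [pvColA_char]
  rw [← List.sum_toFinset _ (PySem.Set.nodup_ofList (pvColLabels cols st.1 x))]
  have hlab : ∀ l ∈ (PySem.Set.ofList (pvColLabels cols st.1 x) : List Int).toFinset,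
      1 ≤ l ∧ l < st.2.2 := by
    intro l hl
    rw [List.mem_toFinset, PySem.Set.mem_ofList, mem_pvColLabels] at hl
    obtain ⟨⟨y, hy1, hy2, hm⟩, hne⟩ := hl
    have := hrange (y, x) ⟨hy1, hy2, hx.1, hx.2⟩
    simp only at this
    rw [hm] at this
    omega
  rw [Finset.sum_congr rfl (fun l hl => hval l (hlab l hl).1 (hlab l hl).2)]
  rw [show ∑ l ∈ (PySem.Set.ofList (pvColLabels cols st.1 x) : List Int).toFinset,
      (pvCount l st.1 : Int) =
      ((∑ l ∈ (PySem.Set.ofList (pvColLabels cols st.1 x) : List Int).toFinset,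
        pvCount l st.1 : Nat) : Int) from by push_cast; rfl]
  rw [Finset.sum_congr rfl (fun l _ => pvCount_eq_card hsh l)]
  rw [← Finset.card_biUnion (by
    intro a ha b hb hab
    simp only [Function.onFun]
    rw [Finset.disjoint_filter]
    intro p hp hpa hpb
    exact hab (hpa ▸ hpb ▸ rfl))]
  -- the union of the components seen in column x is exactly B's seen set
  have hset : ((PySem.Set.ofList (pvColLabels cols st.1 x) : List Int).toFinset).biUnion
      (fun l => (pvCells rows cols).filter (fun p => pvMget st.1 p.1 p.2 = l)) =
      S.toFinset := by
    apply Finset.ext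
    intro p
    rw [Finset.mem_biUnion, List.mem_toFinset, smem p]
    constructor
    · rintro ⟨l, hl, hp⟩
      rw [List.mem_toFinset, PySem.Set.mem_ofList, mem_pvColLabels] at hl
      obtain ⟨⟨y, hy1, hy2, hm⟩, hne⟩ := hl
      rw [Finset.mem_filter, mem_pvCells] at hp
      obtain ⟨hinb, hpl⟩ := hp
      have hyinb : pvInb rows cols (y, x) := ⟨hy1, hy2, hx.1, hx.2⟩
      have hy0 : pvMget st.1 y x ≠ 0 := by rw [hm]; exact hne
      have hconn : pvConn land rows cols (y, x) p :=
        hfib (y, x) p hyinb hinb hy0 (by rw [hm, hpl])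
      refine ⟨⟨hinb, ?_⟩, y, hy1, hy2, hland (y, x) hyinb hy0, hconn⟩
      exact (pvConn_good_right hconn).2
    · rintro ⟨hg, y, hy1, hy2, hyl, hconn⟩
      have hyinb : pvInb rows cols (y, x) := ⟨hy1, hy2, hx.1, hx.2⟩
      have hy0 : pvMget st.1 y x ≠ 0 := hall (y, x) ⟨hyinb, hyl⟩
      refine ⟨pvMget st.1 y x, ?_, ?_⟩
      · rw [List.mem_toFinset, PySem.Set.mem_ofList, mem_pvColLabels]
        exact ⟨⟨y, hy1, hy2, rfl⟩, hy0⟩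
      · rw [Finset.mem_filter, mem_pvCells]
        exact ⟨hg.1, hconst (y, x) p hyinb hy0 hconn⟩
  rw [hset, List.toFinset_card_of_nodup snd]

-- max(list) of the appended values versus a running max with accumulator 0
lemma pvMaxFold (f g : Int → Int) (l : List Int) (hne : l ≠ [])
    (hfg : ∀ v ∈ l, f v = g v) (h0 : ∀ v ∈ l, 0 ≤ f v) :
    (PySem.List.max? (l.foldl (fun ans x => ans ++ [f x]) ([] : List Int))
        (fun v => v)).getD 0 =
      l.foldl (fun best x => max best (g x)) 0 := by
  rw [PySem.List.foldl_append_singleton_eq_map, List.nil_append]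
  cases l with
  | nil => exact absurd rfl hne
  | cons a t =>
    rw [List.map_cons, PySem.List.max?_id_cons, Option.getD_some, List.foldl_cons]
    have ha : max 0 (g a) = f a := by
      rw [← hfg a List.mem_cons_self]
      exact max_eq_right (h0 a List.mem_cons_self)
    rw [ha, List.foldl_map]
    apply PySem.List.foldl_congr_mem
    intro acc v hv
    rw [hfg v (List.mem_cons_of_mem _ hv)]

-- ===== VERDICT (by name: the statement is the Claim_ definition above) =====
theorem solution_spec : Claim_equal_solution := by
  unfold Claim_equal_solution Spec_solution
  intro land _hdom hpre
  obtain ⟨hnil, hhead, -⟩ := hpre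
  cases land with
  | nil => exact absurd rfl hnil
  | cons r0 land' =>
    have hrpos : 0 < r0.length := by
      cases r0 with
      | nil => exact absurd rfl hhead
      | cons a t => simp
    simp only [solution, solution_alt, PySem.List.pyGetD_zero_cons, PySem.List.len_eq]
    have hinv0 : pvInv (r0 :: land') (r0.length : Int) (((r0 :: land').length : Nat) : Int)
        (List.replicate ((((r0 :: land').length : Nat) : Int)).toNat
          (List.replicate ((r0.length : Int)).toNat (0 : Int)),
          (PySem.Dict.empty : PySem.Dict Int Int), 1) := by
      refine ⟨⟨by simp, ?_⟩, le_refl 1, ?_, ?_, ?_, ?_, ?_⟩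
      · intro r hr
        rw [List.eq_of_mem_replicate hr]
        simp
      · intro p _
        rw [pvMget_replicate_zero]
        exact ⟨le_refl 0, zero_lt_one⟩
      · intro p _ h0
        exact absurd (pvMget_replicate_zero _ _ _ _) h0
      · intro p q _ h0
        exact absurd (pvMget_replicate_zero _ _ _ _) h0
      · intro p q _ _ h0
        exact absurd (pvMget_replicate_zero _ _ _ _) h0
      · intro l hl1 hl2
        have hl2' : l < 1 := hl2
        omega
    obtain ⟨hinvF, -, hhandled⟩ := pvScan_inv (r0 :: land') (r0.length : Int)
      (((r0 :: land').length : Nat) : Int)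
      (PySem.List.pyRange 0 (r0.length : Int) 1)
      (by
        intro x hx
        rw [PySem.List.mem_pyRange_one] at hx
        exact hx)
      (List.replicate ((((r0 :: land').length : Nat) : Int)).toNat
          (List.replicate ((r0.length : Int)).toNat (0 : Int)),
          (PySem.Dict.empty : PySem.Dict Int Int), 1) hinv0
    have hall : ∀ p : Int × Int,
        pvGood (r0 :: land') (r0.length : Int) (((r0 :: land').length : Nat) : Int) p →
        pvMget ((PySem.List.pyRange 0 (r0.length : Int) 1).foldl (fun st x =>
          (PySem.List.pyRange 0 (((r0 :: land').length : Nat) : Int) 1).foldl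
            (fun st y => pvCellA (r0 :: land') (r0.length : Int)
              (((r0 :: land').length : Nat) : Int) st x y) st)
          (List.replicate ((((r0 :: land').length : Nat) : Int)).toNat
            (List.replicate ((r0.length : Int)).toNat (0 : Int)),
            (PySem.Dict.empty : PySem.Dict Int Int), 1)).1 p.1 p.2 ≠ 0 := by
      intro p hg
      obtain ⟨⟨h1, h2, h3, h4⟩, hl⟩ := hg
      exact hhandled p.2 (by rw [PySem.List.mem_pyRange_one]; exact ⟨h3, h4⟩) p.1 h1 h2 hl
    have hne : PySem.List.pyRange 0 (r0.length : Int) 1 ≠ [] := by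
      intro h
      have hlen : (PySem.List.pyRange 0 (r0.length : Int) 1).length =
          ((r0.length : Int) - 0).toNat := PySem.List.length_pyRange_one ..
      rw [h] at hlen
      simp at hlen
      omega
    have hfg : ∀ v ∈ PySem.List.pyRange 0 (r0.length : Int) 1,
        pvColA (((r0 :: land').length : Nat) : Int)
          ((PySem.List.pyRange 0 (r0.length : Int) 1).foldl (fun st x =>
            (PySem.List.pyRange 0 (((r0 :: land').length : Nat) : Int) 1).foldl
              (fun st y => pvCellA (r0 :: land') (r0.length : Int)
                (((r0 :: land').length : Nat) : Int) st x y) st)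
            (List.replicate ((((r0 :: land').length : Nat) : Int)).toNat
              (List.replicate ((r0.length : Int)).toNat (0 : Int)),
              (PySem.Dict.empty : PySem.Dict Int Int), 1)).1
          ((PySem.List.pyRange 0 (r0.length : Int) 1).foldl (fun st x =>
            (PySem.List.pyRange 0 (((r0 :: land').length : Nat) : Int) 1).foldl
              (fun st y => pvCellA (r0 :: land') (r0.length : Int)
                (((r0 :: land').length : Nat) : Int) st x y) st)
            (List.replicate ((((r0 :: land').length : Nat) : Int)).toNat
              (List.replicate ((r0.length : Int)).toNat (0 : Int)),
              (PySem.Dict.empty : PySem.Dict Int Int), 1)).2.1 v =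
        (((pvColLoop (r0 :: land') (r0.length : Int) (((r0 :: land').length : Nat) : Int)
          ((((r0 :: land').length : Nat) : Int).toNat * ((r0.length : Int)).toNat +
            ((((r0 :: land').length : Nat) : Int)).toNat + 1)
          ((PySem.List.pyRange 0 (((r0 :: land').length : Nat) : Int) 1).filterMap
            (fun y => if pvMget (r0 :: land') y v = 1 then some (y, v) else none))
          (PySem.Set.ofList ((PySem.List.pyRange 0 (((r0 :: land').length : Nat) : Int) 1).filterMap
            (fun y => if pvMget (r0 :: land') y v = 1 then some (y, v) else none)))) :
              List (Int × Int)).length : Int) := by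
      intro v hv
      rw [PySem.List.mem_pyRange_one] at hv
      exact pvColValue (r0 :: land') (r0.length : Int) (((r0 :: land').length : Nat) : Int)
        _ hinvF hall v hv
    refine pvMaxFold _ _ _ hne hfg ?_
    intro v hv
    rw [hfg v hv]
    exact Int.natCast_nonneg _
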